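-- pv_equiv track=rewrite | github.com/wyk18703232953/myResearch | codeComplex/data/filteredData/python/linear/python_linear_0475.py | core_solve
-- ===== SOURCE A (Python) =====
-- from collections import defaultdict
--
-- def core_solve(n, c, a):
--     vis = [False] * (n + 1)
--     ans = 0
--     d = defaultdict(lambda: 0)
--     cycleno = 0
--     for i in range(1, n + 1):
--         if not vis[i]:
--             cur = i
--             while not vis[cur]:
--                 d[cur] = cycleno
--                 vis[cur] = True
--                 cur = a[cur]
--             if d[cur] == cycleno:
--                 min_ = c[cur]
--                 first = cur
--                 cur = a[cur]
--                 while first != cur: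
--                     min_ = min(c[cur], min_)
--                     cur = a[cur]
--                 ans += min_
--             cycleno += 1
--     return ans
-- ===== SOURCE B (Python) =====
-- def core_solve(n, c, a):
--     # Kahn-style peeling: count indegrees, peel zero-indegree nodes with a stack;
--     # survivors are exactly the cycle nodes; then one walk per cycle sums its min cost.
--     indeg = [0] * (n + 1)
--     for i in range(1, n + 1):
--         indeg[a[i]] += 1
--     stack = [v for v in range(1, n + 1) if indeg[v] == 0]
--     while stack:
--         v = stack.pop()
--         w = a[v]
--         indeg[w] -= 1
--         if indeg[w] == 0:
--             stack.append(w)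
--     visited = [False] * (n + 1)
--     ans = 0
--     for i in range(1, n + 1):
--         if indeg[i] > 0 and not visited[i]:
--             m = c[i]
--             visited[i] = True
--             cur = a[i]
--             while cur != i:
--                 m = min(m, c[cur])
--                 visited[cur] = True
--                 cur = a[cur]
--             ans += m
--     return ans
-- ===== Notes on version B (the rewrite author's own statement) =====
-- stated objective: alternative
-- what changed: B replaces A's discovery traversal (walk from every unvisited node, defaultdict of component ids, cycleno counter, membership-epoch test) by topological peeling: it counts indegrees, peels zero-indegree nodes with a stack so the survivors are exactly the cycle nodes, then walks each cycle once to add its minimum cost.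
-- outside the precondition, e.g. on core_solve(2, [5, 7, 9], [0, 0, 1]): A returns 5, B returns 0
import Mathlib
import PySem

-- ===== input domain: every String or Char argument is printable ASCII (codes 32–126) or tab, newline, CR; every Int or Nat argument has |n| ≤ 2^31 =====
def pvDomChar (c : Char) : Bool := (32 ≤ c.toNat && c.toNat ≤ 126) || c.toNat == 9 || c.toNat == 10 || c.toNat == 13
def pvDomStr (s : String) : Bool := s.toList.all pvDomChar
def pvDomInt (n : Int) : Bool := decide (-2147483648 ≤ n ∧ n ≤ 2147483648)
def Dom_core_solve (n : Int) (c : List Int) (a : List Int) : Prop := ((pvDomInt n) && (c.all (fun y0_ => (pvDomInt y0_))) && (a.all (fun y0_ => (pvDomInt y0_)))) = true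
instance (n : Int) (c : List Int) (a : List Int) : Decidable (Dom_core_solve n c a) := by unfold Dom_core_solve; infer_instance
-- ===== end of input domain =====

-- B is an alternative algorithm: instead of A's discovery traversal (walk from every
-- unvisited node with a defaultdict of component ids and a cycleno epoch test), B peels
-- zero-indegree nodes with a stack (Kahn style), so the surviving nodes are exactly the
-- cycle nodes, and then walks each cycle once to add its minimum cost.
-- Equivalence is proved on Pre_ (1-indexed functional graph, successors in 1..n);
-- pyGetD/pySetD totalise the list accesses that Pre_ keeps in range.

-- ===== PORT A =====
-- shared totalised accessors (exact on Pre_, where every index is in range and non-negative)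
def pvGetB (xs : List Bool) (i : Int) : Bool := PySem.List.pyGetD xs i false
def pvGetI (xs : List Int) (i : Int) : Int := PySem.List.pyGetD xs i 0
def pvSetB (xs : List Bool) (i : Int) (v : Bool) : List Bool := PySem.List.pySetD xs i v
def pvSetI (xs : List Int) (i : Int) (v : Int) : List Int := PySem.List.pySetD xs i v

-- the inner `while not vis[cur]` of A: mark d[cur]=cycleno, vis[cur]=True, cur=a[cur]
def walkA (a : List Int) (cyc : Int) : Nat → List Bool → PySem.Dict Int Int → Int →
    List Bool × PySem.Dict Int Int × Int
  | 0, vis, d, cur => (vis, d, cur)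
  | fuel+1, vis, d, cur =>
    if pvGetB vis cur then (vis, d, cur)
    else walkA a cyc fuel (pvSetB vis cur true) (d.insert cur cyc) (pvGetI a cur)

-- A's second walk around the cycle: while first != cur: min_ = min(c[cur], min_); cur = a[cur]
def cwalkA (c a : List Int) (first : Int) : Nat → Int → Int → Int
  | 0, _, m => m
  | fuel+1, cur, m =>
    if cur = first then m
    else cwalkA c a first fuel (pvGetI a cur) (min (pvGetI c cur) m)

-- body of A's `for i in range(1, n+1)`; state = (vis, ans, d, cycleno)
def stepA (c a : List Int) (fuel : Nat)
    (st : List Bool × Int × PySem.Dict Int Int × Int) (i : Int) :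
    List Bool × Int × PySem.Dict Int Int × Int :=
  if pvGetB st.1 i then st
  else
    let r := walkA a st.2.2.2 fuel st.1 st.2.2.1 i
    let ans := if r.2.1.getD r.2.2 0 = st.2.2.2
      then st.2.1 + cwalkA c a r.2.2 fuel (pvGetI a r.2.2) (pvGetI c r.2.2)
      else st.2.1
    (r.1, ans, r.2.1, st.2.2.2 + 1)

def core_solve (n : Int) (c : List Int) (a : List Int) : Int :=
  ((PySem.List.pyRange 1 (n+1) 1).foldl (stepA c a (n.toNat + 2))
    (List.replicate (n+1).toNat false, 0, (PySem.Dict.empty : PySem.Dict Int Int), 0)).2.1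

-- ===== PORT B =====
-- `for i in range(1, n+1): indeg[a[i]] += 1` then the seed list of zero-indegree nodes.
def bIndeg0 (n : Int) (a : List Int) : List Int :=
  (PySem.List.pyRange 1 (n+1) 1).foldl
    (fun ind i => pvSetI ind (pvGetI a i) (pvGetI ind (pvGetI a i) + 1))
    (List.replicate (n+1).toNat 0)

-- the `while stack:` peel loop; the stack's TOP is the list head, so Python's
-- `stack.pop()` (last element) is the head here and the seed list is reversed below.
def peel (a : List Int) : Nat → List Int → List Int → List Int
  | 0, _, ind => ind
  | fuel+1, stack, ind =>
    match stack with
    | [] => ind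
    | v :: rest =>
      let w := pvGetI a v
      let ind' := pvSetI ind w (pvGetI ind w - 1)
      if pvGetI ind' w = 0 then peel a fuel (w :: rest) ind'
      else peel a fuel rest ind'

-- `while cur != i: m = min(m, c[cur]); visited[cur] = True; cur = a[cur]`
def cycWalk (c a : List Int) (i : Int) : Nat → Int → Int → List Bool → Int × List Bool
  | 0, _, m, visd => (m, visd)
  | fuel+1, cur, m, visd =>
    if cur = i then (m, visd)
    else cycWalk c a i fuel (pvGetI a cur) (min m (pvGetI c cur)) (pvSetB visd cur true)

-- body of B's second loop; state = (visited, ans)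
def stepB2 (c a : List Int) (ind : List Int) (fuel : Nat)
    (st : List Bool × Int) (i : Int) : List Bool × Int :=
  if 0 < pvGetI ind i ∧ pvGetB st.1 i = false then
    let r := cycWalk c a i fuel (pvGetI a i) (pvGetI c i) (pvSetB st.1 i true)
    (r.2, st.2 + r.1)
  else st

def core_solve_alt (n : Int) (c : List Int) (a : List Int) : Int :=
  let ind0 := bIndeg0 n a
  let seeds := ((PySem.List.pyRange 1 (n+1) 1).filter (fun v => pvGetI ind0 v == 0)).reverse
  let indF := peel a (n.toNat + 1) seeds ind0
  ((PySem.List.pyRange 1 (n+1) 1).foldl (stepB2 c a indF (n.toNat + 1))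
    (List.replicate (n+1).toNat false, 0)).2

-- ===== PRECONDITION & SPEC =====
-- Pre_ keeps the natural 1-indexed functional-graph domain (successor values a[1..n] inside
-- 1..n, lists long enough).  It excludes inputs where some a[1..n] is 0 or negative, on which
-- A wanders onto the padding slot 0 (or Python's wrapped negative indices) as pseudo-nodes —
-- an artefact of storing 1-indexed data in 0-based lists — or raises IndexError.
def Pre_core_solve (n : Int) (c : List Int) (a : List Int) : Prop :=
  n ≤ 0 ∨ (0 < n ∧ n + 1 ≤ (c.length : Int) ∧ n + 1 ≤ (a.length : Int) ∧
    ∀ x ∈ (a.drop 1).take n.toNat, 1 ≤ x ∧ x ≤ n)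
instance (n : Int) (c : List Int) (a : List Int) : Decidable (Pre_core_solve n c a) := by
  unfold Pre_core_solve; infer_instance

def pvWitness_core_solve : Int × List Int × List Int := (2, [0, 3, 1], [0, 2, 1])

def Spec_core_solve (n : Int) (c : List Int) (a : List Int) (out : Int) : Prop := out = core_solve_alt n c a
instance (n : Int) (c : List Int) (a : List Int) (out : Int) : Decidable (Spec_core_solve n c a out) := by unfold Spec_core_solve; infer_instance

-- ===== CLAIM (what is proved, stated in full; the proofs are below) =====
def Claim_equal_core_solve : Prop := ∀ (n : Int) (c : List Int) (a : List Int), Dom_core_solve n c a → Pre_core_solve n c a → Spec_core_solve n c a (core_solve n c a)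

-- ===== LEMMAS AND PROOFS =====

-- proof-only helpers ------------------------------------------------------

-- consecutive a-steps along a list, ending (conceptually) at t
def LinkedTo (a : List Int) : List Int → Int → Prop
  | [], _ => True
  | x :: xs, t => pvGetI a x = xs.headD t ∧ LinkedTo a xs t

-- path-recording description of A's inner walk (proof layer only)
def pwalk (a : List Int) : Nat → List Bool → List Int → Int → List Bool × List Int × Int
  | 0, vis, path, cur => (vis, path, cur)
  | fuel+1, vis, path, cur =>
    if pvGetB vis cur then (vis, path, cur)
    else pwalk a fuel (pvSetB vis cur true) (path ++ [cur]) (pvGetI a cur)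

-- invariant tying A's dict of component ids to the visited array
def dOK (n : Int) (d : PySem.Dict Int Int) (cyc : Int) (vis : List Bool) : Prop :=
  ∀ v : Int, 1 ≤ v → v ≤ n → pvGetB vis v = true → d.getD v 0 < cyc

-- basic facts about the totalised accessors ---------------------------------

theorem pvGetB_nonneg (vis : List Bool) (v : Int) (h : 0 ≤ v) :
    pvGetB vis v = vis.getD v.toNat false := by
  simp [pvGetB, PySem.List.pyGetD_of_nonneg vis false h]

theorem pvSetB_nonneg (vis : List Bool) (v : Int) (b : Bool) (h : 0 ≤ v) :
    pvSetB vis v b = vis.set v.toNat b := by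
  simp [pvSetB, PySem.List.pySetD_of_nonneg vis b h]

theorem length_pvSetB (vis : List Bool) (v : Int) (b : Bool) :
    (pvSetB vis v b).length = vis.length := by
  simp [pvSetB, PySem.List.length_pySetD]

theorem getB_set_self (vis : List Bool) (v : Int) (h0 : 0 ≤ v) (hv : v.toNat < vis.length) :
    pvGetB (pvSetB vis v true) v = true := by
  rw [pvSetB_nonneg _ _ _ h0, pvGetB_nonneg _ _ h0]
  simp [List.getD_eq_getElem?_getD, List.getElem?_set_self hv]

theorem getB_set_ne (vis : List Bool) (v x : Int) (h0 : 0 ≤ x) (h1 : 0 ≤ v) (hne : x ≠ v) :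
    pvGetB (pvSetB vis v true) x = pvGetB vis x := by
  rw [pvSetB_nonneg _ _ _ h1, pvGetB_nonneg _ _ h0, pvGetB_nonneg _ _ h0]
  have : v.toNat ≠ x.toNat := by omega
  simp [List.getD_eq_getElem?_getD, List.getElem?_set_ne this]

theorem getB_replicate (m : Nat) (v : Int) : pvGetB (List.replicate m false) v = false := by
  unfold pvGetB
  rcases h : PySem.List.pyGet? (List.replicate m false) v with _ | b
  · simp [PySem.List.pyGetD, h]
  · have hb := PySem.List.mem_of_pyGet?_eq_some (List.replicate m false) h
    have := List.eq_of_mem_replicate hb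
    simp [PySem.List.pyGetD, h, this]

theorem count_false_set (vis : List Bool) (k : Nat) (hk : k < vis.length)
    (hv : vis.getD k false = false) :
    (vis.set k true).count false + 1 = vis.count false := by
  induction vis generalizing k with
  | nil => simp at hk
  | cons b t ih =>
    cases k with
    | zero => simp_all
    | succ k =>
      simp only [List.set_cons_succ, List.count_cons]
      have := ih k (by simpa using hk) (by simpa using hv)
      omega

-- Int-list accessor twins
theorem pvGetI_nonneg (xs : List Int) (v : Int) (h : 0 ≤ v) :
    pvGetI xs v = xs.getD v.toNat 0 := by
  simp [pvGetI, PySem.List.pyGetD_of_nonneg xs 0 h]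

theorem length_pvSetI (xs : List Int) (v : Int) (b : Int) :
    (pvSetI xs v b).length = xs.length := by
  simp [pvSetI, PySem.List.length_pySetD]

theorem getI_set_self (xs : List Int) (v : Int) (b : Int) (h0 : 0 ≤ v)
    (hv : v.toNat < xs.length) : pvGetI (pvSetI xs v b) v = b := by
  rw [pvSetI, PySem.List.pySetD_of_nonneg xs b h0, pvGetI_nonneg _ _ h0]
  simp [List.getD_eq_getElem?_getD, List.getElem?_set_self hv]

theorem getI_set_ne (xs : List Int) (v x : Int) (b : Int) (h0 : 0 ≤ x) (h1 : 0 ≤ v)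
    (hne : x ≠ v) : pvGetI (pvSetI xs v b) x = pvGetI xs x := by
  rw [pvSetI, PySem.List.pySetD_of_nonneg xs b h1, pvGetI_nonneg _ _ h0, pvGetI_nonneg _ _ h0]
  have : v.toNat ≠ x.toNat := by omega
  simp [List.getD_eq_getElem?_getD, List.getElem?_set_ne this]

theorem getI_replicate (m : Nat) (v : Int) : pvGetI (List.replicate m 0) v = 0 := by
  unfold pvGetI
  rcases h : PySem.List.pyGet? (List.replicate m (0:Int)) v with _ | b
  · simp [PySem.List.pyGetD, h]
  · have hb := PySem.List.mem_of_pyGet?_eq_some (List.replicate m (0:Int)) h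
    have := List.eq_of_mem_replicate hb
    simp [PySem.List.pyGetD, h, this]

-- the successor function stays inside 1..n
theorem aStep (n : Int) (a : List Int) (ha : n + 1 ≤ (a.length : Int))
    (hab : ∀ x ∈ (a.drop 1).take n.toNat, 1 ≤ x ∧ x ≤ n)
    (v : Int) (h0 : 1 ≤ v) (h1 : v ≤ n) : 1 ≤ pvGetI a v ∧ pvGetI a v ≤ n := by
  have hlen : v.toNat < a.length := by omega
  have hget : pvGetI a v = a[v.toNat] := by
    rw [pvGetI_nonneg a v (by omega), List.getD_eq_getElem?_getD]
    simp [List.getElem?_eq_getElem hlen]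
  have hidx : v.toNat - 1 < ((a.drop 1).take n.toNat).length := by
    simp [List.length_take, List.length_drop]
    omega
  have hmem : a[v.toNat] ∈ (a.drop 1).take n.toNat := by
    have hval : ((a.drop 1).take n.toNat)[v.toNat - 1]'hidx = a[v.toNat] := by
      rw [List.getElem_take, List.getElem_drop]
      congr 1
      omega
    rw [← hval]
    exact List.getElem_mem _
  rw [hget]
  exact hab _ hmem

-- the two descriptions of A's inner walk run in lock-step --------------------

theorem pwalk_shift (a : List Int) : ∀ (fuel : Nat) (vis : List Bool) (p : List Int) (cur : Int),
    pwalk a fuel vis p cur =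
      ((pwalk a fuel vis [] cur).1, p ++ (pwalk a fuel vis [] cur).2.1,
        (pwalk a fuel vis [] cur).2.2) := by
  intro fuel
  induction fuel with
  | zero => intro vis p cur; simp [pwalk]
  | succ fuel ih =>
    intro vis p cur
    by_cases h : pvGetB vis cur
    · simp [pwalk, h]
    · simp only [pwalk, h, Bool.false_eq_true, if_false, List.nil_append]
      rw [ih (pvSetB vis cur true) (p ++ [cur]) (pvGetI a cur),
          ih (pvSetB vis cur true) [cur] (pvGetI a cur)]
      simp

theorem walkA_eq (a : List Int) (cyc : Int) :
    ∀ (fuel : Nat) (vis : List Bool) (d : PySem.Dict Int Int) (cur : Int),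
    (walkA a cyc fuel vis d cur).1 = (pwalk a fuel vis [] cur).1 ∧
    (walkA a cyc fuel vis d cur).2.2 = (pwalk a fuel vis [] cur).2.2 := by
  intro fuel
  induction fuel with
  | zero => intro vis d cur; simp [walkA, pwalk]
  | succ fuel ih =>
    intro vis d cur
    by_cases h : pvGetB vis cur
    · simp [walkA, pwalk, h]
    · simp only [walkA, pwalk, h, Bool.false_eq_true, if_false, List.nil_append]
      rw [pwalk_shift a fuel (pvSetB vis cur true) [cur] (pvGetI a cur)]
      exact ⟨(ih _ _ _).1, (ih _ _ _).2⟩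

theorem walkA_d (a : List Int) (cyc : Int) :
    ∀ (fuel : Nat) (vis : List Bool) (d : PySem.Dict Int Int) (cur x : Int),
    ((walkA a cyc fuel vis d cur).2.1).getD x 0 =
      if x ∈ (pwalk a fuel vis [] cur).2.1 then cyc else d.getD x 0 := by
  intro fuel
  induction fuel with
  | zero => intro vis d cur x; simp [walkA, pwalk]
  | succ fuel ih =>
    intro vis d cur x
    by_cases h : pvGetB vis cur
    · simp [walkA, pwalk, h]
    · simp only [walkA, pwalk, h, Bool.false_eq_true, if_false, List.nil_append]
      rw [pwalk_shift a fuel (pvSetB vis cur true) [cur] (pvGetI a cur)]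
      rw [ih (pvSetB vis cur true) (d.insert cur cyc) (pvGetI a cur) x]
      rw [PySem.Dict.getD_insert]
      by_cases hw : x ∈ (pwalk a fuel (pvSetB vis cur true) [] (pvGetI a cur)).2.1
      · simp [hw]
      · by_cases hx : x = cur <;> simp [hw, hx]

-- everything the per-iteration argument needs about one recorded walk
theorem pwalk_master (n : Int) (a : List Int) (ha : n + 1 ≤ (a.length : Int))
    (hab : ∀ x ∈ (a.drop 1).take n.toNat, 1 ≤ x ∧ x ≤ n) :
    ∀ (fuel : Nat) (vis : List Bool) (cur : Int),
    vis.length = n.toNat + 1 → 1 ≤ cur → cur ≤ n → vis.count false < fuel →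
    (∀ x ∈ (pwalk a fuel vis [] cur).2.1, (1 ≤ x ∧ x ≤ n) ∧ pvGetB vis x = false) ∧
    (pwalk a fuel vis [] cur).2.1.Nodup ∧
    (1 ≤ (pwalk a fuel vis [] cur).2.2 ∧ (pwalk a fuel vis [] cur).2.2 ≤ n) ∧
    (pwalk a fuel vis [] cur).1.length = n.toNat + 1 ∧
    pvGetB (pwalk a fuel vis [] cur).1 (pwalk a fuel vis [] cur).2.2 = true ∧
    LinkedTo a (pwalk a fuel vis [] cur).2.1 (pwalk a fuel vis [] cur).2.2 ∧
    ((pwalk a fuel vis [] cur).2.1 = [] → (pwalk a fuel vis [] cur).2.2 = cur) ∧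
    ((pwalk a fuel vis [] cur).2.1 ≠ [] → (pwalk a fuel vis [] cur).2.1.head? = some cur) ∧
    (pwalk a fuel vis [] cur).2.1.length + (pwalk a fuel vis [] cur).1.count false
      = vis.count false ∧
    (∀ x : Int, 1 ≤ x → x ≤ n →
      (pvGetB (pwalk a fuel vis [] cur).1 x = true ↔
        pvGetB vis x = true ∨ x ∈ (pwalk a fuel vis [] cur).2.1)) := by
  intro fuel
  induction fuel with
  | zero => intro vis cur hvl h0 h1 hf; omega
  | succ fuel ih =>
    intro vis cur hvl h0 h1 hf
    by_cases h : pvGetB vis cur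
    · simp only [pwalk, h, if_true]
      exact ⟨by simp, List.nodup_nil, ⟨h0, h1⟩, hvl,
        by simp [h], by trivial, by simp, by simp, by simp,
        by intro x _ _; simp⟩
    · have hcurlt : cur.toNat < vis.length := by omega
      have hgd : vis.getD cur.toNat false = false := by
        have hb := pvGetB_nonneg vis cur (by omega)
        rw [hb] at h
        simpa using h
      have hlen' : (pvSetB vis cur true).length = n.toNat + 1 := by
        rw [length_pvSetB]; exact hvl
      have hcnt : (pvSetB vis cur true).count false + 1 = vis.count false := by
        rw [pvSetB_nonneg vis cur true (by omega)]
        exact count_false_set vis cur.toNat hcurlt hgd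
      have hcur2 := aStep n a ha hab cur h0 h1
      have hvisf : pvGetB vis cur = false := by simpa using h
      have hset : pvGetB (pvSetB vis cur true) cur = true := getB_set_self vis cur (by omega) hcurlt
      simp only [pwalk, h, Bool.false_eq_true, if_false, List.nil_append]
      rw [pwalk_shift a fuel (pvSetB vis cur true) [cur] (pvGetI a cur)]
      obtain ⟨m1, m2, m3, m4, m6, m7, m8, m9, m10, m11⟩ :=
        ih (pvSetB vis cur true) (pvGetI a cur) hlen' hcur2.1 hcur2.2 (by omega)
      set r := pwalk a fuel (pvSetB vis cur true) [] (pvGetI a cur) with hr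
      have hcurnot : cur ∉ r.2.1 := by
        intro hmem
        have := (m1 cur hmem).2
        rw [hset] at this
        cases this
      refine ⟨?_, ?_, m3, m4, m6, ?_, ?_, ?_, ?_, ?_⟩
      · intro x hx
        rcases List.mem_cons.mp (by simpa using hx) with rfl | hx'
        · exact ⟨⟨h0, h1⟩, hvisf⟩
        · obtain ⟨hbnd, hfalse⟩ := m1 x hx'
          have hxc : x ≠ cur := by
            intro rfl_eq; subst rfl_eq
            rw [hset] at hfalse; cases hfalse
          rw [← getB_set_ne vis cur x (by omega) (by omega) hxc]
          exact ⟨hbnd, hfalse⟩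
      · simpa using List.Nodup.cons hcurnot m2
      · refine ⟨?_, m7⟩
        cases hw : r.2.1 with
        | nil => simpa [hw] using (m8 hw).symm
        | cons y t =>
          have := m9 (by simp [hw])
          rw [hw] at this
          simp only [List.head?_cons, Option.some.injEq] at this
          simp [this]
      · intro hcontra; simp at hcontra
      · intro _; rfl
      · simp only [List.singleton_append, List.length_cons]
        omega
      · intro x hx0 hx1
        constructor
        · intro hvx
          rcases (m11 x hx0 hx1).mp hvx with hv' | hmem
          · by_cases hxc : x = cur
            · subst hxc; simp
            · rw [getB_set_ne vis cur x (by omega) (by omega) hxc] at hv'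
              exact Or.inl hv'
          · simp [hmem]
        · intro hvx
          rcases hvx with hv' | hmem
          · have hx' : pvGetB (pvSetB vis cur true) x = true := by
              by_cases hxc : x = cur
              · subst hxc; exact hset
              · rw [getB_set_ne vis cur x (by omega) (by omega) hxc]; exact hv'
            exact (m11 x hx0 hx1).mpr (Or.inl hx')
          · rcases List.mem_cons.mp (by simpa using hmem) with rfl | hx'
            · exact (m11 x hx0 hx1).mpr (Or.inl hset)
            · exact (m11 x hx0 hx1).mpr (Or.inr hx')



-- iterate theory ------------------------------------------------------------

def iterF (a : List Int) : Nat → Int → Int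
  | 0, v => v
  | k+1, v => iterF a k (pvGetI a v)

theorem iterF_succ' (a : List Int) : ∀ (k : Nat) (v : Int),
    iterF a (k+1) v = pvGetI a (iterF a k v) := by
  intro k
  induction k with
  | zero => intro v; rfl
  | succ k ih => intro v; rw [show k+1+1 = (k+1)+1 from rfl]; simp only [iterF]; exact ih _

theorem iterF_add (a : List Int) (j k : Nat) (v : Int) :
    iterF a (j + k) v = iterF a k (iterF a j v) := by
  induction k with
  | zero => rfl
  | succ k ih => rw [show j + (k+1) = (j+k)+1 from rfl, iterF_succ', ih, ← iterF_succ']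

-- membership in 1..n is preserved by iteration
theorem iterF_mem (n : Int) (a : List Int)
    (hf : ∀ v, 1 ≤ v → v ≤ n → 1 ≤ pvGetI a v ∧ pvGetI a v ≤ n) :
    ∀ (k : Nat) (v : Int), 1 ≤ v → v ≤ n → 1 ≤ iterF a k v ∧ iterF a k v ≤ n := by
  intro k
  induction k with
  | zero => intro v h0 h1; exact ⟨h0, h1⟩
  | succ k ih =>
    intro v h0 h1
    simp only [iterF]
    exact ih _ (hf v h0 h1).1 (hf v h0 h1).2

def OnCyc (a : List Int) (v : Int) : Prop := ∃ k : Nat, 0 < k ∧ iterF a k v = v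

-- eventual periodicity: once the trajectory repeats with gap p, it is p-periodic
theorem iter_eventual (a : List Int) (s p : Nat) (j : Int) (hp : 0 < p)
    (h : iterF a (s + p) j = iterF a s j) :
    ∀ d, iterF a (s + d) j = iterF a (s + d % p) j := by
  intro d
  induction d using Nat.strong_induction_on with
  | _ d ih =>
    by_cases hd : d < p
    · rw [Nat.mod_eq_of_lt hd]
    · have hd' : p ≤ d := Nat.le_of_not_lt hd
      have h1 : iterF a (s + d) j = iterF a (s + (d - p)) j := by
        have : s + d = (s + p) + (d - p) := by omega
        rw [this, iterF_add, h, ← iterF_add]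
      rw [h1, ih (d - p) (by omega), Nat.mod_eq_sub_mod hd']

theorem onCyc_mod (a : List Int) (v : Int) (p : Nat) (hp : 0 < p) (hcyc : iterF a p v = v) :
    ∀ t, iterF a t v = iterF a (t % p) v := by
  intro t
  have := iter_eventual a 0 p v hp (by simpa using hcyc) t
  simpa using this

theorem onCyc_step (a : List Int) (v : Int) (h : OnCyc a v) : OnCyc a (pvGetI a v) := by
  obtain ⟨k, hk, hkv⟩ := h
  refine ⟨k, hk, ?_⟩
  have : iterF a (k+1) v = pvGetI a v := by rw [iterF_succ', hkv]
  calc iterF a k (pvGetI a v) = iterF a (1 + k) v := by rw [iterF_add]; rfl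
    _ = pvGetI a v := by rw [Nat.add_comm, this]

theorem onCyc_iter (a : List Int) (v : Int) (m : Nat) (h : OnCyc a v) :
    OnCyc a (iterF a m v) := by
  induction m with
  | zero => exact h
  | succ m ih => rw [iterF_succ']; exact onCyc_step a _ ih

-- two nodes on the same cycle
def CycEq (a : List Int) (v w : Int) : Prop := OnCyc a v ∧ ∃ m : Nat, iterF a m v = w

theorem cycEq_onCyc (a : List Int) (v w : Int) (h : CycEq a v w) : OnCyc a w := by
  obtain ⟨hv, m, rfl⟩ := h
  exact onCyc_iter a v m hv

theorem cycEq_symm (a : List Int) (v w : Int) (h : CycEq a v w) : CycEq a w v := by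
  obtain ⟨⟨k, hk, hkv⟩, m, rfl⟩ := h
  refine ⟨onCyc_iter a v m ⟨k, hk, hkv⟩, ?_⟩
  -- go around: find l with (m + l) % k = 0
  refine ⟨k - m % k, ?_⟩
  rw [← iterF_add]
  have hmod : iterF a (m + (k - m % k)) v = iterF a ((m + (k - m % k)) % k) v :=
    onCyc_mod a v k hk hkv _
  rw [hmod]
  have hmk : m % k < k := Nat.mod_lt _ hk
  have h5 : m + (k - m % k) = k * (m / k) + k := by
    have := Nat.div_add_mod m k
    omega
  rw [h5, show k * (m / k) + k = k * (m / k + 1) by ring, Nat.mul_mod_right]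
  rfl

theorem cycEq_trans (a : List Int) (u v w : Int) (h1 : CycEq a u v) (h2 : CycEq a v w) :
    CycEq a u w := by
  obtain ⟨hu, m1, rfl⟩ := h1
  obtain ⟨_, m2, rfl⟩ := h2
  exact ⟨hu, m1 + m2, iterF_add a m1 m2 u⟩

-- the least period, and its bound ------------------------------------------

theorem period_spec (a : List Int) (v : Int) (h : OnCyc a v) :
    0 < Nat.find h ∧ iterF a (Nat.find h) v = v ∧
      ∀ s, 0 < s → s < Nat.find h → iterF a s v ≠ v := by
  refine ⟨(Nat.find_spec h).1, (Nat.find_spec h).2, ?_⟩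
  intro s hs hlt hcon
  have hle : Nat.find h ≤ s := Nat.find_le (⟨hs, hcon⟩ : 0 < s ∧ iterF a s v = v)
  omega

-- distinct nodup-list-in-range length bound
theorem nodup_len_le (n : Int) (l : List Int) (hl : l.Nodup)
    (hb : ∀ x ∈ l, 1 ≤ x ∧ x ≤ n) : l.length ≤ n.toNat := by
  classical
  have hsub : l.toFinset ⊆ Finset.Icc 1 n := by
    intro x hx
    rw [List.mem_toFinset] at hx
    rw [Finset.mem_Icc]
    exact hb x hx
  have hcard := Finset.card_le_card hsub
  rw [List.toFinset_card_of_nodup hl] at hcard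
  rw [Int.card_Icc] at hcard
  omega

-- the first p iterates of a cycle node are pairwise distinct
theorem period_iter_nodup (a : List Int) (v : Int) (h : OnCyc a v) :
    ∀ s t, s < t → t < Nat.find h → iterF a s v ≠ iterF a t v := by
  obtain ⟨hp, hcyc, hmin⟩ := period_spec a v h
  intro s t hst ht hcon
  -- then iterF (p - t + s) v = v with 0 < p - t + s < p
  have key : iterF a (Nat.find h - t + s) v = v := by
    have h1 : iterF a (Nat.find h - t) (iterF a t v) = v := by
      rw [← iterF_add]
      have : t + (Nat.find h - t) = Nat.find h := by omega
      rw [this, hcyc]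
    calc iterF a (Nat.find h - t + s) v = iterF a (s + (Nat.find h - t)) v := by ring_nf
      _ = iterF a (Nat.find h - t) (iterF a s v) := iterF_add a s _ v
      _ = iterF a (Nat.find h - t) (iterF a t v) := by rw [hcon]
      _ = v := h1
  by_cases hs0 : 0 < Nat.find h - t + s
  · exact hmin _ hs0 (by omega) key
  · omega

theorem period_le (n : Int) (a : List Int)
    (hf : ∀ v, 1 ≤ v → v ≤ n → 1 ≤ pvGetI a v ∧ pvGetI a v ≤ n)
    (v : Int) (h0 : 1 ≤ v) (h1 : v ≤ n) (h : OnCyc a v) : Nat.find h ≤ n.toNat := by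
  set p := Nat.find h with hp
  have hl : ((List.range p).map (fun m => iterF a m v)).Nodup := by
    rw [List.nodup_map_iff_inj_on List.nodup_range]
    intro s hs t ht hst
    rcases Nat.lt_trichotomy s t with hlt | rfl | hgt
    · exact absurd hst (period_iter_nodup a v h s t hlt (List.mem_range.mp ht))
    · rfl
    · exact absurd hst.symm (period_iter_nodup a v h t s hgt (List.mem_range.mp hs))
  have hb : ∀ x ∈ (List.range p).map (fun m => iterF a m v), 1 ≤ x ∧ x ≤ n := by
    intro x hx
    obtain ⟨m, _, rfl⟩ := List.mem_map.mp hx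
    exact iterF_mem n a hf m v h0 h1
  have := nodup_len_le n _ hl hb
  simpa using this

-- computable cycle data ------------------------------------------------------

def cycL (n : Int) (a : List Int) (v : Int) : List Int :=
  (List.range n.toNat).map (fun m => iterF a m v)

def minList : List Int → Int
  | [] => 0
  | x :: xs => xs.foldl min x

def cycMinI (n : Int) (c a : List Int) (v : Int) : Int :=
  minList ((cycL n a v).map (fun w => pvGetI c w))

def onCycB (n : Int) (a : List Int) (v : Int) : Bool :=
  (List.range n.toNat).any (fun k => iterF a (k+1) v == v)

def isRepB (n : Int) (a : List Int) (v : Int) : Bool :=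
  onCycB n a v && (cycL n a v).all (fun w => decide (v ≤ w))

theorem onCycB_iff (n : Int) (a : List Int)
    (hf : ∀ v, 1 ≤ v → v ≤ n → 1 ≤ pvGetI a v ∧ pvGetI a v ≤ n)
    (hn : 0 < n) (v : Int) (h0 : 1 ≤ v) (h1 : v ≤ n) :
    onCycB n a v = true ↔ OnCyc a v := by
  constructor
  · intro h
    obtain ⟨k, _, hk⟩ := List.any_eq_true.mp h
    exact ⟨k+1, Nat.succ_pos _, by simpa using hk⟩
  · intro h
    have hple := period_le n a hf v h0 h1 h
    obtain ⟨hp, hcyc, _⟩ := period_spec a v h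
    apply List.any_eq_true.mpr
    refine ⟨Nat.find h - 1, List.mem_range.mpr (by omega), ?_⟩
    have : Nat.find h - 1 + 1 = Nat.find h := by omega
    rw [this]
    simpa using hcyc

-- membership in cycL vs CycEq
theorem mem_cycL_iff (n : Int) (a : List Int)
    (hf : ∀ v, 1 ≤ v → v ≤ n → 1 ≤ pvGetI a v ∧ pvGetI a v ≤ n)
    (hn : 0 < n) (v : Int) (h0 : 1 ≤ v) (h1 : v ≤ n) (hv : OnCyc a v) (w : Int) :
    w ∈ cycL n a v ↔ CycEq a v w := by
  constructor
  · intro h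
    obtain ⟨m, _, rfl⟩ := List.mem_map.mp h
    exact ⟨hv, m, rfl⟩
  · rintro ⟨_, m, rfl⟩
    obtain ⟨hp, hcyc, _⟩ := period_spec a v hv
    have hple := period_le n a hf v h0 h1 hv
    apply List.mem_map.mpr
    refine ⟨m % Nat.find hv, List.mem_range.mpr (by
      have := Nat.mod_lt m hp
      omega), ?_⟩
    exact (onCyc_mod a v _ hp hcyc m).symm

theorem self_mem_cycL (n : Int) (a : List Int) (hn : 0 < n) (v : Int) : v ∈ cycL n a v := by
  apply List.mem_map.mpr
  exact ⟨0, List.mem_range.mpr (by omega), rfl⟩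

-- minList toolkit ------------------------------------------------------------

theorem minList_le (l : List Int) (x : Int) (hx : x ∈ l) : minList l ≤ x := by
  cases l with
  | nil => cases hx
  | cons y t =>
    simp only [minList]
    rcases List.mem_cons.mp hx with rfl | ht
    · exact (PySem.List.foldl_min_le t x).1
    · exact (PySem.List.foldl_min_le t y).2 _ ht

theorem minList_mem (l : List Int) (hl : l ≠ []) : minList l ∈ l := by
  cases l with
  | nil => exact absurd rfl hl
  | cons y t =>
    simp only [minList]
    rcases PySem.List.foldl_min_mem t y with h | h
    · rw [h]; exact List.mem_cons_self
    · exact List.mem_cons_of_mem _ h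

theorem minList_eq_of_same_mem (l1 l2 : List Int) (h1 : l1 ≠ []) (h2 : l2 ≠ [])
    (hmem : ∀ x, x ∈ l1 ↔ x ∈ l2) : minList l1 = minList l2 := by
  apply le_antisymm
  · exact minList_le l1 _ ((hmem _).mpr (minList_mem l2 h2))
  · exact minList_le l2 _ ((hmem _).mp (minList_mem l1 h1))

theorem cycL_ne_nil (n : Int) (a : List Int) (hn : 0 < n) (v : Int) : cycL n a v ≠ [] := by
  intro h
  have := self_mem_cycL n a hn v
  rw [h] at this
  cases this

-- cycL of two nodes on the same cycle has the same elements
theorem cycL_same (n : Int) (a : List Int)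
    (hf : ∀ v, 1 ≤ v → v ≤ n → 1 ≤ pvGetI a v ∧ pvGetI a v ≤ n)
    (hn : 0 < n) (v w : Int) (h0 : 1 ≤ v) (h1 : v ≤ n) (hvw : CycEq a v w) :
    ∀ x, x ∈ cycL n a v ↔ x ∈ cycL n a w := by
  intro x
  have hw0 : 1 ≤ w ∧ w ≤ n := by
    obtain ⟨_, m, rfl⟩ := hvw
    exact iterF_mem n a hf m v h0 h1
  have hv : OnCyc a v := hvw.1
  have hw : OnCyc a w := cycEq_onCyc a v w hvw
  rw [mem_cycL_iff n a hf hn v h0 h1 hv, mem_cycL_iff n a hf hn w hw0.1 hw0.2 hw]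
  constructor
  · intro h; exact cycEq_trans a w v x (cycEq_symm a v w hvw) h
  · intro h; exact cycEq_trans a v w x hvw h

theorem cycMinI_same (n : Int) (c a : List Int)
    (hf : ∀ v, 1 ≤ v → v ≤ n → 1 ≤ pvGetI a v ∧ pvGetI a v ≤ n)
    (hn : 0 < n) (v w : Int) (h0 : 1 ≤ v) (h1 : v ≤ n) (hvw : CycEq a v w) :
    cycMinI n c a v = cycMinI n c a w := by
  apply minList_eq_of_same_mem
  · simp [cycL_ne_nil n a hn v]
  · simp [cycL_ne_nil n a hn w]
  · intro x
    simp only [List.mem_map]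
    constructor
    · rintro ⟨y, hy, rfl⟩
      exact ⟨y, (cycL_same n a hf hn v w h0 h1 hvw y).mp hy, rfl⟩
    · rintro ⟨y, hy, rfl⟩
      exact ⟨y, (cycL_same n a hf hn v w h0 h1 hvw y).mpr hy, rfl⟩

-- representative = least node of its cycle; unique on each cycle
theorem rep_unique (n : Int) (a : List Int)
    (hf : ∀ v, 1 ≤ v → v ≤ n → 1 ≤ pvGetI a v ∧ pvGetI a v ≤ n)
    (hn : 0 < n) (v w : Int) (h0 : 1 ≤ v) (h1 : v ≤ n) (hw0 : 1 ≤ w) (hw1 : w ≤ n)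
    (hvw : CycEq a v w)
    (hv : isRepB n a v = true) (hw : isRepB n a w = true) : v = w := by
  obtain ⟨_, hv2⟩ := Bool.and_eq_true_iff.mp hv
  obtain ⟨_, hw2⟩ := Bool.and_eq_true_iff.mp hw
  have hvin : v ∈ cycL n a w :=
    (cycL_same n a hf hn v w h0 h1 hvw v).mp (self_mem_cycL n a hn v)
  have hwin : w ∈ cycL n a v :=
    (cycL_same n a hf hn v w h0 h1 hvw w).mpr (self_mem_cycL n a hn w)
  have h1' := List.all_eq_true.mp hv2 w hwin
  have h2' := List.all_eq_true.mp hw2 v hvin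
  simp only [decide_eq_true_eq] at h1' h2'
  omega


-- list-sum machinery ---------------------------------------------------------

theorem sum_update (L : List Int) (hL : L.Nodup) (g g' : Int → Int) (v0 : Int)
    (hv : v0 ∈ L) (hother : ∀ w ∈ L, w ≠ v0 → g' w = g w) :
    (L.map g').sum = (L.map g).sum + (g' v0 - g v0) := by
  induction L with
  | nil => cases hv
  | cons x t ih =>
    rcases List.mem_cons.mp hv with rfl | hvt
    · have ht : ∀ w ∈ t, g' w = g w := by
        intro w hw
        exact hother w (List.mem_cons_of_mem _ hw) (fun he => (List.nodup_cons.mp hL).1 (he ▸ hw))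
      simp only [List.map_cons, List.sum_cons]
      rw [List.map_congr_left ht]
      ring
    · have hx : g' x = g x := by
        apply hother x List.mem_cons_self
        intro he
        exact (List.nodup_cons.mp hL).1 (he ▸ hvt)
      simp only [List.map_cons, List.sum_cons]
      rw [hx, ih (List.nodup_cons.mp hL).2 hvt
        (fun w hw hne => hother w (List.mem_cons_of_mem _ hw) hne)]
      ring

-- indegree counting -----------------------------------------------------------

def EIn (n : Int) (a : List Int) (w : Int) : Nat :=
  (PySem.List.pyRange 1 (n+1) 1).countP (fun v => pvGetI a v == w)

theorem countP_le_of_nodup_subset (P L : List Int) (q : Int → Bool)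
    (hP : P.Nodup) (hsub : ∀ x ∈ P, x ∈ L) : P.countP q ≤ L.countP q :=
  (List.Nodup.subperm hP hsub).countP_le q

theorem exists_unseen_of_countP_lt (P L : List Int) (q : Int → Bool)
    (hL : L.Nodup) (hlt : P.countP q < L.countP q) :
    ∃ v ∈ L, q v = true ∧ v ∉ P := by
  by_contra hcon
  simp only [not_exists, not_and, not_not] at hcon
  have hsub : ∀ x ∈ L.filter q, x ∈ P.filter q := by
    intro x hx
    rw [List.mem_filter] at hx ⊢
    exact ⟨by
      rcases hcon x hx.1 hx.2 with h
      exact h, hx.2⟩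
  have hnd : (L.filter q).Nodup := hL.filter q
  have := countP_le_of_nodup_subset (L.filter q) (P.filter q) (fun _ => true) hnd hsub
  simp only [List.countP_true] at this
  rw [List.countP_eq_length_filter, List.countP_eq_length_filter] at hlt
  have hle : (P.filter q).length ≤ P.countP q := by
    rw [List.countP_eq_length_filter]
  omega

theorem indeg_fold (a : List Int) (L : List Int) : ∀ ind : List Int,
    (∀ i ∈ L, 0 ≤ pvGetI a i ∧ (pvGetI a i).toNat < ind.length) →
    (L.foldl (fun ind i => pvSetI ind (pvGetI a i) (pvGetI ind (pvGetI a i) + 1)) ind).length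
        = ind.length ∧
    ∀ w, 0 ≤ w → w.toNat < ind.length →
      pvGetI (L.foldl (fun ind i => pvSetI ind (pvGetI a i) (pvGetI ind (pvGetI a i) + 1)) ind) w
        = pvGetI ind w + (L.countP (fun i => pvGetI a i == w) : Int) := by
  induction L with
  | nil => intro ind _; exact ⟨rfl, by intro w _ _; simp⟩
  | cons x t ih =>
    intro ind hb
    have hx := hb x List.mem_cons_self
    set w0 := pvGetI a x with hw0
    set ind' := pvSetI ind w0 (pvGetI ind w0 + 1) with hind'
    have hlen' : ind'.length = ind.length := length_pvSetI _ _ _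
    have hb' : ∀ i ∈ t, 0 ≤ pvGetI a i ∧ (pvGetI a i).toNat < ind'.length := by
      intro i hi
      rw [hlen']
      exact hb i (List.mem_cons_of_mem _ hi)
    obtain ⟨ihl, ihv⟩ := ih ind' hb'
    constructor
    · simp only [List.foldl_cons]
      rw [ihl, hlen']
    · intro w hw hwl
      simp only [List.foldl_cons]
      rw [ihv w hw (by omega), List.countP_cons]
      by_cases hww : w = w0
      · subst hww
        rw [getI_set_self ind w0 _ hx.1 (by omega)]
        simp only [hw0]
        rw [if_pos (by simp)]
        push_cast
        ring
      · rw [getI_set_ne ind w0 w _ hw hx.1 hww]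
        rw [if_neg (by simp; omega)]
        simp

-- initial indegrees are the in-edge counts
theorem bIndeg0_char (n : Int) (a : List Int) (hn : 0 < n)
    (hf : ∀ v, 1 ≤ v → v ≤ n → 1 ≤ pvGetI a v ∧ pvGetI a v ≤ n) :
    (bIndeg0 n a).length = n.toNat + 1 ∧
    ∀ w, 0 ≤ w → w ≤ n → pvGetI (bIndeg0 n a) w = (EIn n a w : Int) := by
  have hrepl : (List.replicate (n+1).toNat (0:Int)).length = n.toNat + 1 := by
    simp [List.length_replicate]
    omega
  have hb : ∀ i ∈ PySem.List.pyRange 1 (n+1) 1,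
      0 ≤ pvGetI a i ∧ (pvGetI a i).toNat < (List.replicate (n+1).toNat (0:Int)).length := by
    intro i hi
    have hi' := PySem.List.mem_pyRange_one.mp hi
    have := hf i (by omega) (by omega)
    constructor
    · omega
    · rw [hrepl]; omega
  obtain ⟨hl, hv⟩ := indeg_fold a (PySem.List.pyRange 1 (n+1) 1) _ hb
  constructor
  · rw [bIndeg0, hl, hrepl]
  · intro w hw0 hw1
    rw [bIndeg0, hv w hw0 (by rw [hrepl]; omega), getI_replicate]
    simp [EIn]

-- the peel loop: full run with ghost popped list -------------------------------

theorem peel_run (n : Int) (a : List Int) (hn : 0 < n)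
    (hf : ∀ v, 1 ≤ v → v ≤ n → 1 ≤ pvGetI a v ∧ pvGetI a v ≤ n) :
    ∀ (fuel : Nat) (stack P ind : List Int),
    (stack ++ P).Nodup →
    (∀ x ∈ stack ++ P, 1 ≤ x ∧ x ≤ n) →
    ind.length = n.toNat + 1 →
    (∀ w, 1 ≤ w → w ≤ n →
      pvGetI ind w = (EIn n a w : Int) - (P.countP (fun v => pvGetI a v == w) : Int)) →
    (∀ u, 1 ≤ u → u ≤ n → (pvGetI ind u = 0 ↔ u ∈ stack ++ P)) →
    (∀ j (hj : j < P.length), ∀ u, 1 ≤ u → u ≤ n →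
        pvGetI a u = P[j] → u ∈ P.drop (j+1)) →
    n.toNat < fuel + P.length →
    ∃ Pf : List Int,
      Pf.Nodup ∧ (∀ x ∈ Pf, 1 ≤ x ∧ x ≤ n) ∧
      (∀ w, 1 ≤ w → w ≤ n →
        pvGetI (peel a fuel stack ind) w
          = (EIn n a w : Int) - (Pf.countP (fun v => pvGetI a v == w) : Int)) ∧
      (∀ u, 1 ≤ u → u ≤ n → (pvGetI (peel a fuel stack ind) u = 0 ↔ u ∈ Pf)) ∧
      (∀ j (hj : j < Pf.length), ∀ u, 1 ≤ u → u ≤ n →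
        pvGetI a u = Pf[j] → u ∈ Pf.drop (j+1)) := by
  intro fuel
  induction fuel with
  | zero =>
    intro stack P ind hnd hbnd hlen hcount hiff hord hfuel
    exfalso
    have : (stack ++ P).length ≤ n.toNat := nodup_len_le n _ hnd hbnd
    rw [List.length_append] at this
    omega
  | succ fuel ih =>
    intro stack P ind hnd hbnd hlen hcount hiff hord hfuel
    match hst : stack with
    | [] =>
      refine ⟨P, by simpa using hnd, by simpa using hbnd, ?_, ?_, hord⟩
      · intro w hw0 hw1; simpa [peel] using hcount w hw0 hw1
      · intro u hu0 hu1; simpa [peel] using hiff u hu0 hu1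
    | v :: rest =>
      subst hst
      have hvb : 1 ≤ v ∧ v ≤ n := hbnd v (by simp)
      have hw := hf v hvb.1 hvb.2
      set w := pvGetI a v with hwdef
      clear_value w
      -- P is nodup, v ∉ P, v ∉ rest
      have hPnd : P.Nodup := (List.nodup_append.mp hnd).2.1
      have hvP : v ∉ P := by
        exact fun hc => List.disjoint_of_nodup_append hnd (by simp) hc
      have hvrest : v ∉ rest := by
        have := (List.nodup_append.mp hnd).1
        exact (List.nodup_cons.mp this).1
      -- subset facts for counting
      have hPsub : ∀ x ∈ P, x ∈ PySem.List.pyRange 1 (n+1) 1 := by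
        intro x hx
        have := hbnd x (by simp [hx])
        exact PySem.List.mem_pyRange_one.mpr (by omega)
      have hvP' : (v :: P).Nodup := List.nodup_cons.mpr ⟨hvP, hPnd⟩
      have hvPsub : ∀ x ∈ v :: P, x ∈ PySem.List.pyRange 1 (n+1) 1 := by
        intro x hx
        rcases List.mem_cons.mp hx with rfl | hx'
        · exact PySem.List.mem_pyRange_one.mpr (by omega)
        · exact hPsub x hx'
      have hcnt_le : ((v :: P).countP (fun u => pvGetI a u == w)) ≤ EIn n a w :=
        countP_le_of_nodup_subset _ _ _ hvP' hvPsub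
      have hqv : (fun u => pvGetI a u == w) v = true := by simp [hwdef]
      have hcntv : ((v :: P).countP (fun u => pvGetI a u == w))
          = P.countP (fun u => pvGetI a u == w) + 1 := by
        rw [List.countP_cons, if_pos hqv]
      -- old value at w is ≥ 1
      have hold : pvGetI ind w = (EIn n a w : Int)
          - (P.countP (fun u => pvGetI a u == w) : Int) := hcount w hw.1 hw.2
      have holdpos : 1 ≤ pvGetI ind w := by
        rw [hold]; omega
      set ind' := pvSetI ind w (pvGetI ind w - 1) with hind'
      have hlen' : ind'.length = n.toNat + 1 := by rw [hind', length_pvSetI, hlen]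
      have hgw : pvGetI ind' w = pvGetI ind w - 1 := by
        rw [hind']
        exact getI_set_self ind w _ (by omega) (by omega)
      have hgne : ∀ u, 0 ≤ u → u ≠ w → pvGetI ind' u = pvGetI ind u := by
        intro u hu hne
        rw [hind']
        exact getI_set_ne ind w u _ hu (by omega) hne
      -- new ghost list
      have hcount' : ∀ u, 1 ≤ u → u ≤ n →
          pvGetI ind' u = (EIn n a u : Int)
            - (((v :: P).countP (fun x => pvGetI a x == u)) : Int) := by
        intro u hu0 hu1
        by_cases hne : u = w
        · subst hne
          rw [hgw, hold, hcntv]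
          push_cast
          ring
        · rw [hgne u (by omega) hne, hcount u hu0 hu1, List.countP_cons,
            if_neg (by simp; omega)]
          simp
      have hord' : ∀ j (hj : j < (v :: P).length), ∀ u, 1 ≤ u → u ≤ n →
          pvGetI a u = (v :: P)[j] → u ∈ (v :: P).drop (j+1) := by
        intro j hj u hu0 hu1 hju
        match j with
        | 0 =>
          -- in-neighbours of v are all in P
          simp only [List.getElem_cons_zero] at hju
          simp only [List.drop_succ_cons, List.drop_zero]
          by_contra huP
          have hcnt2 : ((u :: P).countP (fun x => pvGetI a x == v))
              = P.countP (fun x => pvGetI a x == v) + 1 := by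
            rw [List.countP_cons, if_pos (by simp [hju])]
          have hnd2 : (u :: P).Nodup := List.nodup_cons.mpr ⟨huP, hPnd⟩
          have hsub2 : ∀ x ∈ u :: P, x ∈ PySem.List.pyRange 1 (n+1) 1 := by
            intro x hx
            rcases List.mem_cons.mp hx with rfl | hx'
            · exact PySem.List.mem_pyRange_one.mpr (by omega)
            · exact hPsub x hx'
          have hle2 : ((u :: P).countP (fun x => pvGetI a x == v)) ≤ EIn n a v :=
            countP_le_of_nodup_subset _ _ _ hnd2 hsub2
          -- but ind v = 0 since v is on the stack
          have hv0 : pvGetI ind v = 0 := (hiff v hvb.1 hvb.2).mpr (by simp)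
          have := hcount v hvb.1 hvb.2
          omega
        | j'+1 =>
          simp only [List.getElem_cons_succ] at hju
          simp only [List.drop_succ_cons]
          exact hord j' (by simpa using hj) u hu0 hu1 hju
      by_cases hpush : pvGetI ind' w = 0
      · -- push w
        have hwnotold : w ∉ (v :: rest) ++ P := by
          intro hc
          have := (hiff w hw.1 hw.2).mpr hc
          omega
        have hperm : ((v :: rest) ++ P).Perm (rest ++ (v :: P)) := by
          simpa using List.perm_middle.symm
        have h1 : (rest ++ (v :: P)).Nodup := hperm.nodup_iff.mp hnd
        have hnd'' : ((w :: rest) ++ (v :: P)).Nodup := by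
          apply List.nodup_cons.mpr
          refine ⟨?_, h1⟩
          intro hc
          apply hwnotold
          simp only [List.append_eq, List.mem_append, List.mem_cons] at hc ⊢
          tauto
        have hbnd'' : ∀ x ∈ (w :: rest) ++ (v :: P), 1 ≤ x ∧ x ≤ n := by
          intro x hx
          simp only [List.append_eq, List.mem_append, List.mem_cons] at hx
          by_cases hxw : x = w
          · rw [hxw]; exact hw
          · have hx' : x ∈ rest ∨ (x = v ∨ x ∈ P) := by tauto
            apply hbnd
            simp only [List.append_eq, List.mem_append, List.mem_cons]
            tauto
        have hiff'' : ∀ u, 1 ≤ u → u ≤ n →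
            (pvGetI ind' u = 0 ↔ u ∈ (w :: rest) ++ (v :: P)) := by
          intro u hu0 hu1
          by_cases hne : u = w
          · subst hne
            simp [hpush]
          · rw [hgne u (by omega) hne, hiff u hu0 hu1]
            simp only [List.append_eq, List.mem_append, List.mem_cons]
            constructor
            · intro hc
              tauto
            · intro hc
              tauto
        have hres : peel a (fuel+1) (v :: rest) ind = peel a fuel (w :: rest) ind' := by
          simp only [peel]
          rw [← hwdef, ← hind', if_pos hpush]
        rw [hres]
        exact ih (w :: rest) (v :: P) ind' hnd'' hbnd'' hlen' hcount' hiff'' hord'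
          (by simp; omega)
      · -- no push
        have hperm : ((v :: rest) ++ P).Perm (rest ++ (v :: P)) := by
          simpa using List.perm_middle.symm
        have hnd'' : (rest ++ (v :: P)).Nodup := hperm.nodup_iff.mp hnd
        have hbnd'' : ∀ x ∈ rest ++ (v :: P), 1 ≤ x ∧ x ≤ n := by
          intro x hx
          apply hbnd
          simp only [List.append_eq, List.mem_append, List.mem_cons] at hx ⊢
          tauto
        have hiff'' : ∀ u, 1 ≤ u → u ≤ n →
            (pvGetI ind' u = 0 ↔ u ∈ rest ++ (v :: P)) := by
          intro u hu0 hu1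
          by_cases hne : u = w
          · subst hne
            constructor
            · intro hc; exact absurd hc hpush
            · intro hc
              exfalso
              apply hpush
              have hwold : u ∈ (v :: rest) ++ P := by
                simp only [List.append_eq, List.mem_append, List.mem_cons] at hc ⊢
                tauto
              have := (hiff u hu0 hu1).mpr hwold
              omega
          · rw [hgne u (by omega) hne, hiff u hu0 hu1]
            simp only [List.append_eq, List.mem_append, List.mem_cons]
            constructor
            · intro hc
              tauto
            · intro hc
              tauto
        have hres : peel a (fuel+1) (v :: rest) ind = peel a fuel rest ind' := by
          simp only [peel]
          rw [← hwdef, ← hind', if_neg hpush]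
        rw [hres]
        exact ih rest (v :: P) ind' hnd'' hbnd'' hlen' hcount' hiff'' hord'
          (by simp; omega)


-- getD helpers ---------------------------------------------------------------

theorem getD_mem (l : List Int) (j : Nat) (h : j < l.length) : l.getD j 0 ∈ l := by
  rw [List.getD_eq_getElem?_getD, List.getElem?_eq_getElem h]
  exact List.getElem_mem h

theorem mem_getD (l : List Int) (x : Int) (h : x ∈ l) :
    ∃ j, j < l.length ∧ l.getD j 0 = x := by
  obtain ⟨i, hi, rfl⟩ := List.mem_iff_getElem.mp h
  refine ⟨i, hi, ?_⟩
  rw [List.getD_eq_getElem?_getD, List.getElem?_eq_getElem hi]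
  rfl

theorem getD_drop (l : List Int) (m t : Nat) (h : m + t < l.length) :
    (l.drop m).getD t 0 = l.getD (m + t) 0 := by
  rw [List.getD_eq_getElem?_getD, List.getD_eq_getElem?_getD, List.getElem?_drop]

-- walking a recorded backward chain with iterF -------------------------------

theorem chain_iter (a : List Int) (l : List Int)
    (hc : ∀ j, j + 1 < l.length → pvGetI a (l.getD j 0) = l.getD (j+1) 0) :
    ∀ s j, j + s < l.length → iterF a s (l.getD j 0) = l.getD (j+s) 0 := by
  intro s
  induction s with
  | zero => intro j h; rfl
  | succ s ih =>
    intro j h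
    have h1 : j + 1 < l.length := by omega
    have hstep : iterF a (s+1) (l.getD j 0) = iterF a s (pvGetI a (l.getD j 0)) := rfl
    rw [hstep, hc j h1]
    have := ih (j+1) (by omega)
    rw [this, show j + 1 + s = j + (s+1) from by omega]

-- nodes popped by the peel are never cycle nodes ------------------------------

theorem popped_not_onCyc (n : Int) (a : List Int)
    (hf : ∀ v, 1 ≤ v → v ≤ n → 1 ≤ pvGetI a v ∧ pvGetI a v ≤ n)
    (Pf : List Int) (hbnd : ∀ x ∈ Pf, 1 ≤ x ∧ x ≤ n)
    (hord : ∀ j (hj : j < Pf.length), ∀ u, 1 ≤ u → u ≤ n →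
      pvGetI a u = Pf[j] → u ∈ Pf.drop (j+1)) :
    ∀ j, j < Pf.length → ¬ OnCyc a (Pf.getD j 0) := by
  have hordD : ∀ j, j < Pf.length → ∀ u, 1 ≤ u → u ≤ n →
      pvGetI a u = Pf.getD j 0 → u ∈ Pf.drop (j+1) := by
    intro j hj u h0 h1 he
    apply hord j hj u h0 h1
    rw [he, List.getD_eq_getElem?_getD, List.getElem?_eq_getElem hj]
    rfl
  suffices haux : ∀ k j, Pf.length - j ≤ k → j < Pf.length → ¬ OnCyc a (Pf.getD j 0) by
    intro j hj
    exact haux Pf.length j (by omega) hj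
  intro k
  induction k with
  | zero => intro j hk hj; omega
  | succ k ih =>
    intro j hk hj hcyc
    set z := Pf.getD j 0 with hz
    have hzb : 1 ≤ z ∧ z ≤ n := hbnd z (getD_mem Pf j hj)
    obtain ⟨hp, hpcyc, _⟩ := period_spec a z hcyc
    set u := iterF a (Nat.find hcyc - 1) z with hu
    have hub : 1 ≤ u ∧ u ≤ n := iterF_mem n a hf _ z hzb.1 hzb.2
    have hfu : pvGetI a u = z := by
      have : iterF a (Nat.find hcyc - 1 + 1) z = pvGetI a u := by
        rw [iterF_succ']
      rw [show Nat.find hcyc - 1 + 1 = Nat.find hcyc from by omega] at this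
      rw [← this, hpcyc]
    have hmem := hordD j hj u hub.1 hub.2 hfu
    obtain ⟨t, ht, htv⟩ := mem_getD _ u hmem
    have htlen : j + 1 + t < Pf.length := by
      have hdl : (Pf.drop (j+1)).length = Pf.length - (j+1) := by simp
      omega
    rw [getD_drop Pf (j+1) t htlen] at htv
    have hucyc : OnCyc a u := onCyc_iter a z _ hcyc
    rw [← htv] at hucyc
    exact ih (j+1+t) (by omega) htlen hucyc

-- every node of a backward-closed survivor set lies on a cycle ----------------

theorem surv_onCyc (n : Int) (a : List Int)
    (hf : ∀ v, 1 ≤ v → v ≤ n → 1 ≤ pvGetI a v ∧ pvGetI a v ≤ n)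
    (Surv : Int → Prop) (hsb : ∀ u, Surv u → 1 ≤ u ∧ u ≤ n)
    (hstep : ∀ u, Surv u → ∃ v, Surv v ∧ pvGetI a v = u) :
    ∀ u, Surv u → OnCyc a u := by
  have haux : ∀ m : Nat, ∀ u, Surv u → OnCyc a u ∨
      ∃ l : List Int, l.length = m + 1 ∧ l.Nodup ∧ (∀ x ∈ l, Surv x) ∧
        (∀ j, j + 1 < l.length → pvGetI a (l.getD j 0) = l.getD (j+1) 0) ∧
        l.getD (l.length - 1) 0 = u := by
    intro m
    induction m with
    | zero =>
      intro u hu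
      refine Or.inr ⟨[u], rfl, List.nodup_singleton u, ?_, ?_, rfl⟩
      · intro x hx
        rw [List.mem_singleton.mp hx]
        exact hu
      · intro j hj
        simp at hj
    | succ m ih =>
      intro u hu
      rcases ih u hu with hdone | ⟨l, hlen, hnd, hsv, hch, hlast⟩
      · exact Or.inl hdone
      have hlpos : 0 < l.length := by omega
      have h0 : Surv (l.getD 0 0) := hsv _ (getD_mem l 0 hlpos)
      obtain ⟨v, hv, hfv⟩ := hstep _ h0
      by_cases hvl : v ∈ l
      · -- v closes a cycle
        obtain ⟨t, htl, htv⟩ := mem_getD l v hvl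
        have h1 : iterF a 1 v = l.getD 0 0 := by
          show iterF a 0 (pvGetI a v) = l.getD 0 0
          rw [hfv]; rfl
        have hcv : OnCyc a v := by
          refine ⟨t + 1, by omega, ?_⟩
          have : iterF a (1 + t) v = iterF a t (iterF a 1 v) := iterF_add a 1 t v
          rw [show t + 1 = 1 + t from by omega, this, h1,
            chain_iter a l hch t 0 (by omega)]
          simpa using htv
        have huv : u = iterF a (1 + (l.length - 1)) v := by
          rw [iterF_add, h1, chain_iter a l hch (l.length - 1) 0 (by omega), ← hlast]
          simp
        rw [huv]
        exact Or.inl (onCyc_iter a v _ hcv)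
      · refine Or.inr ⟨v :: l, by simpa using hlen, List.nodup_cons.mpr ⟨hvl, hnd⟩, ?_, ?_, ?_⟩
        · intro x hx
          rcases List.mem_cons.mp hx with rfl | hx'
          · exact hv
          · exact hsv x hx'
        · intro j hj
          match j with
          | 0 =>
            rw [List.getD_cons_zero, List.getD_cons_succ, hfv]
          | j'+1 =>
            rw [List.getD_cons_succ, List.getD_cons_succ]
            exact hch j' (by simpa using hj)
        · have hlen1 : (v :: l).length - 1 = (l.length - 1) + 1 := by
            simp
            omega
          rw [hlen1, List.getD_cons_succ]
          exact hlast
  intro u hu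
  rcases haux n.toNat u hu with hdone | ⟨l, hlen, hnd, hsv, _, _⟩
  · exact hdone
  exfalso
  have := nodup_len_le n l hnd (fun x hx => hsb x (hsv x hx))
  omega

-- the peeled indegree array (the port's internal value, named for the proofs)
def pIndF (n : Int) (a : List Int) : List Int :=
  peel a (n.toNat + 1)
    (((PySem.List.pyRange 1 (n+1) 1).filter (fun v => pvGetI (bIndeg0 n a) v == 0)).reverse)
    (bIndeg0 n a)

-- survivors of the peel are exactly the cycle nodes
theorem peel_char (n : Int) (a : List Int) (hn : 0 < n)
    (hf : ∀ v, 1 ≤ v → v ≤ n → 1 ≤ pvGetI a v ∧ pvGetI a v ≤ n) :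
    ∀ u, 1 ≤ u → u ≤ n → (0 < pvGetI (pIndF n a) u ↔ OnCyc a u) := by
  obtain ⟨hl0, hv0⟩ := bIndeg0_char n a hn hf
  set seeds := ((PySem.List.pyRange 1 (n+1) 1).filter
    (fun v => pvGetI (bIndeg0 n a) v == 0)).reverse with hseeds
  have hsnd : seeds.Nodup := by
    rw [hseeds, List.nodup_reverse]
    exact (PySem.List.nodup_pyRange_one 1 (n+1)).filter _
  have hsmem : ∀ u, u ∈ seeds ↔
      ((1 ≤ u ∧ u ≤ n) ∧ pvGetI (bIndeg0 n a) u = 0) := by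
    intro u
    rw [hseeds, List.mem_reverse, List.mem_filter, PySem.List.mem_pyRange_one]
    constructor
    · rintro ⟨h1, h2⟩
      exact ⟨⟨by omega, by omega⟩, by simpa using h2⟩
    · rintro ⟨h1, h2⟩
      exact ⟨by omega, by simpa using h2⟩
  obtain ⟨Pf, hPnd, hPb, hPcnt, hPiff, hPord⟩ :=
    peel_run n a hn hf (n.toNat + 1) seeds [] (bIndeg0 n a)
      (by simpa using hsnd)
      (by intro x hx; exact ((hsmem x).mp (by simpa using hx)).1)
      hl0
      (by intro w hw0 hw1; simpa using hv0 w (by omega) hw1)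
      (by
        intro u hu0 hu1
        simp only [List.append_nil]
        rw [hsmem u]
        constructor
        · intro h; exact ⟨⟨hu0, hu1⟩, h⟩
        · intro h; exact h.2)
      (by intro j hj; simp at hj)
      (by simp)
  have hres : pIndF n a = peel a (n.toNat + 1) seeds (bIndeg0 n a) := rfl
  rw [hres]
  -- nonnegativity of the final values
  have hPsub : ∀ x ∈ Pf, x ∈ PySem.List.pyRange 1 (n+1) 1 := by
    intro x hx
    have := hPb x hx
    exact PySem.List.mem_pyRange_one.mpr (by omega)
  have hnneg : ∀ u, 1 ≤ u → u ≤ n →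
      0 ≤ pvGetI (peel a (n.toNat + 1) seeds (bIndeg0 n a)) u := by
    intro u hu0 hu1
    rw [hPcnt u hu0 hu1]
    have := countP_le_of_nodup_subset Pf (PySem.List.pyRange 1 (n+1) 1)
      (fun v => pvGetI a v == u) hPnd hPsub
    have hE : EIn n a u = (PySem.List.pyRange 1 (n+1) 1).countP (fun v => pvGetI a v == u) := rfl
    omega
  intro u hu0 hu1
  constructor
  · -- survivor ⇒ on a cycle
    intro hpos
    have hsurv : ∀ x, (1 ≤ x ∧ x ≤ n ∧ x ∉ Pf) → OnCyc a x := by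
      apply surv_onCyc n a hf _ (fun x hx => ⟨hx.1, hx.2.1⟩)
      intro x hx
      have hxpos : 0 < pvGetI (peel a (n.toNat + 1) seeds (bIndeg0 n a)) x := by
        have h1 := hnneg x hx.1 hx.2.1
        have h2 : pvGetI (peel a (n.toNat + 1) seeds (bIndeg0 n a)) x ≠ 0 := by
          intro hc
          exact hx.2.2 ((hPiff x hx.1 hx.2.1).mp hc)
        omega
      have hlt : Pf.countP (fun v => pvGetI a v == x)
          < (PySem.List.pyRange 1 (n+1) 1).countP (fun v => pvGetI a v == x) := by
        have := hPcnt x hx.1 hx.2.1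
        have hE : EIn n a x = (PySem.List.pyRange 1 (n+1) 1).countP (fun v => pvGetI a v == x) := rfl
        omega
      obtain ⟨v, hvmem, hvq, hvnot⟩ := exists_unseen_of_countP_lt Pf _ _
        (PySem.List.nodup_pyRange_one 1 (n+1)) hlt
      have hvb := PySem.List.mem_pyRange_one.mp hvmem
      exact ⟨v, ⟨by omega, by omega, hvnot⟩, by simpa using hvq⟩
    apply hsurv
    refine ⟨hu0, hu1, ?_⟩
    intro hc
    have := (hPiff u hu0 hu1).mpr hc
    omega
  · -- on a cycle ⇒ survivor
    intro hcyc
    have hnot : u ∉ Pf := by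
      intro hc
      obtain ⟨j, hj, hjv⟩ := mem_getD Pf u hc
      exact popped_not_onCyc n a hf Pf hPb hPord j hj (by rw [hjv]; exact hcyc)
    have h2 : pvGetI (peel a (n.toNat + 1) seeds (bIndeg0 n a)) u ≠ 0 := by
      intro hc
      exact hnot ((hPiff u hu0 hu1).mp hc)
    have := hnneg u hu0 hu1
    omega


-- marking a list of nodes --------------------------------------------------

theorem getB_foldl_set (L : List Int) : ∀ (vd : List Bool),
    (∀ w ∈ L, 0 ≤ w ∧ w.toNat < vd.length) →
    (((L.foldl (fun vd w => pvSetB vd w true) vd)).length = vd.length ∧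
     ∀ x : Int, 0 ≤ x →
       pvGetB (L.foldl (fun vd w => pvSetB vd w true) vd) x
         = (pvGetB vd x || decide (x ∈ L))) := by
  induction L with
  | nil => intro vd _; exact ⟨rfl, by intro x _; simp⟩
  | cons w t ih =>
    intro vd hb
    have hw := hb w List.mem_cons_self
    have hlen : (pvSetB vd w true).length = vd.length := length_pvSetB _ _ _
    obtain ⟨ihl, ihv⟩ := ih (pvSetB vd w true) (by
      intro x hx
      rw [hlen]
      exact hb x (List.mem_cons_of_mem _ hx))
    constructor
    · simp only [List.foldl_cons]
      rw [ihl, hlen]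
    · intro x hx
      simp only [List.foldl_cons]
      rw [ihv x hx]
      by_cases hxw : x = w
      · subst hxw
        rw [getB_set_self vd x hx (by omega)]
        simp
      · rw [getB_set_ne vd w x hx hw.1 hxw]
        simp [hxw]

-- the walk around a cycle, described by iterates ------------------------------

theorem cycWalk_run (n : Int) (c a : List Int) (i : Int) (hcyc : OnCyc a i) :
    ∀ (t s : Nat), s + t = Nat.find hcyc → 1 ≤ s → ∀ fuel, t < fuel → ∀ (m : Int) (visd : List Bool),
    cycWalk c a i fuel (iterF a s i) m visd =
      (((List.range t).map (fun j => pvGetI c (iterF a (s+j) i))).foldl min m,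
       ((List.range t).map (fun j => iterF a (s+j) i)).foldl
         (fun vd w => pvSetB vd w true) visd) := by
  obtain ⟨hp, hpcyc, hpmin⟩ := period_spec a i hcyc
  intro t
  induction t with
  | zero =>
    intro s hs hs1 fuel hfuel m visd
    obtain ⟨f, rfl⟩ : ∃ f, fuel = f + 1 := ⟨fuel - 1, by omega⟩
    have : iterF a s i = i := by
      rw [show s = Nat.find hcyc from by omega, hpcyc]
    rw [this]
    simp [cycWalk]
  | succ t ih =>
    intro s hs hs1 fuel hfuel m visd
    obtain ⟨f, rfl⟩ : ∃ f, fuel = f + 1 := ⟨fuel - 1, by omega⟩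
    have hne : iterF a s i ≠ i := hpmin s (by omega) (by omega)
    simp only [cycWalk, if_neg hne]
    have hstep : pvGetI a (iterF a s i) = iterF a (s+1) i := (iterF_succ' a s i).symm
    rw [hstep, ih (s+1) (by omega) (by omega) f (by omega)]
    rw [List.range_succ_eq_map]
    simp only [List.map_cons, List.map_map, List.foldl_cons]
    rw [Prod.mk.injEq]
    constructor
    · congr 1
      apply List.map_congr_left
      intro j _
      simp only [Function.comp_apply]
      congr 2
      omega
    · congr 1
      apply List.map_congr_left
      intro j _
      simp only [Function.comp_apply]
      congr 1
      omega

-- the listed nodes of a cycle walk are exactly cycL ---------------------------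

theorem walk_elems (n : Int) (a : List Int) (hn : 0 < n)
    (hf : ∀ v, 1 ≤ v → v ≤ n → 1 ≤ pvGetI a v ∧ pvGetI a v ≤ n)
    (i : Int) (h0 : 1 ≤ i) (h1 : i ≤ n) (hcyc : OnCyc a i) :
    ∀ x, x ∈ i :: (List.range (Nat.find hcyc - 1)).map (fun j => iterF a (1+j) i)
      ↔ x ∈ cycL n a i := by
  obtain ⟨hp, hpcyc, _⟩ := period_spec a i hcyc
  have hple := period_le n a hf i h0 h1 hcyc
  intro x
  constructor
  · intro hx
    rcases List.mem_cons.mp hx with rfl | hx'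
    · exact self_mem_cycL n a hn x
    · obtain ⟨j, _, rfl⟩ := List.mem_map.mp hx'
      exact (mem_cycL_iff n a hf hn i h0 h1 hcyc _).mpr ⟨hcyc, 1+j, rfl⟩
  · intro hx
    obtain ⟨hcy, m, rfl⟩ := (mem_cycL_iff n a hf hn i h0 h1 hcyc _).mp hx
    rw [onCyc_mod a i _ hp hpcyc m]
    by_cases hm0 : m % Nat.find hcyc = 0
    · rw [hm0]
      exact List.mem_cons_self
    · apply List.mem_cons_of_mem
      apply List.mem_map.mpr
      refine ⟨m % Nat.find hcyc - 1, List.mem_range.mpr ?_, ?_⟩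
      · have := Nat.mod_lt m hp
        omega
      · congr 1
        have := Nat.mod_lt m hp
        omega

-- one step of B's second loop --------------------------------------------------

theorem stepB2_inv (n : Int) (c a : List Int) (hn : 0 < n)
    (hf : ∀ v, 1 ≤ v → v ≤ n → 1 ≤ pvGetI a v ∧ pvGetI a v ≤ n)
    (k : Nat) (hk : (k:Int) + 1 ≤ n) (st : List Bool × Int)
    (hlen : st.1.length = n.toNat + 1)
    (hvis : ∀ v, 1 ≤ v → v ≤ n →
      (pvGetB st.1 v = true ↔ OnCyc a v ∧ ∃ w ∈ cycL n a v, w ≤ (k:Int)))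
    (hsum : st.2 = ((PySem.List.pyRange 1 (n+1) 1).map
      (fun v => if isRepB n a v && decide (v ≤ (k:Int)) then cycMinI n c a v else 0)).sum) :
    (stepB2 c a (pIndF n a) (n.toNat + 1) st ((k:Int)+1)).1.length = n.toNat + 1 ∧
    (∀ v, 1 ≤ v → v ≤ n →
      (pvGetB (stepB2 c a (pIndF n a) (n.toNat + 1) st ((k:Int)+1)).1 v = true ↔
        OnCyc a v ∧ ∃ w ∈ cycL n a v, w ≤ (k:Int)+1)) ∧
    (stepB2 c a (pIndF n a) (n.toNat + 1) st ((k:Int)+1)).2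
      = ((PySem.List.pyRange 1 (n+1) 1).map
        (fun v => if isRepB n a v && decide (v ≤ (k:Int)+1) then cycMinI n c a v else 0)).sum := by
  set i : Int := (k:Int) + 1 with hidef
  have hi0 : 1 ≤ i := by omega
  have hi1 : i ≤ n := hk
  have hchar := peel_char n a hn hf i hi0 hi1
  by_cases hOn : OnCyc a i
  · by_cases hvisi : pvGetB st.1 i = true
    · -- already visited: its cycle was counted at an earlier node
      obtain ⟨_, w0, hw0mem, hw0le⟩ := (hvis i hi0 hi1).mp hvisi
      have hcond : ¬ (0 < pvGetI (pIndF n a) i ∧ pvGetB st.1 i = false) := by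
        intro hc
        rw [hvisi] at hc
        cases hc.2
      simp only [stepB2, if_neg hcond]
      refine ⟨hlen, ?_, ?_⟩
      · intro v hv0 hv1
        rw [hvis v hv0 hv1]
        constructor
        · rintro ⟨hcv, w, hw, hwle⟩
          exact ⟨hcv, w, hw, by omega⟩
        · rintro ⟨hcv, w, hw, hwle⟩
          refine ⟨hcv, ?_⟩
          by_cases hwi : w = i
          · -- v's cycle contains i; transfer the earlier witness
            rw [hwi] at hw
            have hEq : CycEq a v w0 := by
              apply cycEq_trans a v i w0
              · exact (mem_cycL_iff n a hf hn v hv0 hv1 hcv i).mp hw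
              · exact (mem_cycL_iff n a hf hn i hi0 hi1 hOn w0).mp hw0mem
            refine ⟨w0, ?_, hw0le⟩
            exact (mem_cycL_iff n a hf hn v hv0 hv1 hcv w0).mpr hEq
          · exact ⟨w, hw, by omega⟩
      · rw [hsum]
        apply congrArg
        apply List.map_congr_left
        intro v hv
        have hvb := PySem.List.mem_pyRange_one.mp hv
        by_cases hvi : v = i
        · rw [hvi]
          have hrep : isRepB n a i = false := by
            rw [Bool.eq_false_iff]
            intro htrue
            obtain ⟨-, hall⟩ := Bool.and_eq_true_iff.mp htrue
            have := List.all_eq_true.mp hall w0 hw0mem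
            simp only [decide_eq_true_eq] at this
            omega
          rw [hrep]
          simp
        · have : (decide (v ≤ (k:Int)) = decide (v ≤ (k:Int)+1)) := by
            have : v ≤ (k:Int) ↔ v ≤ (k:Int) + 1 := by
              constructor <;> intro <;> omega
            simp [decide_eq_decide.mpr this]
          rw [this]
    · -- new cycle: walk it
      have hfresh : ∀ w ∈ cycL n a i, i ≤ w := by
        intro w hw
        by_contra hlt
        apply hvisi
        rw [hvis i hi0 hi1]
        exact ⟨hOn, w, hw, by omega⟩
      have hrep : isRepB n a i = true := by
        apply Bool.and_eq_true_iff.mpr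
        constructor
        · exact (onCycB_iff n a hf hn i hi0 hi1).mpr hOn
        · apply List.all_eq_true.mpr
          intro w hw
          simp only [decide_eq_true_eq]
          exact hfresh w hw
      have hcond : 0 < pvGetI (pIndF n a) i ∧ pvGetB st.1 i = false := by
        exact ⟨hchar.mpr hOn, by simpa using hvisi⟩
      simp only [stepB2, if_pos hcond]
      obtain ⟨hp, hpcyc, _⟩ := period_spec a i hOn
      have hple := period_le n a hf i hi0 hi1 hOn
      have hrun := cycWalk_run n c a i hOn (Nat.find hOn - 1) 1 (by omega) (by omega)
        (n.toNat + 1) (by omega) (pvGetI c i) (pvSetB st.1 i true)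
      have h1i : iterF a 1 i = pvGetI a i := by
        rw [iterF_succ' a 0 i]
        rfl
      rw [h1i] at hrun
      rw [hrun]
      dsimp only
      set Lw := (List.range (Nat.find hOn - 1)).map (fun j => iterF a (1+j) i) with hLw
      have hLwb : ∀ w ∈ Lw, 0 ≤ w ∧ w.toNat < (pvSetB st.1 i true).length := by
        intro w hw
        obtain ⟨j, _, rfl⟩ := List.mem_map.mp hw
        have := iterF_mem n a hf (1+j) i hi0 hi1
        rw [length_pvSetB, hlen]
        omega
      obtain ⟨hml, hmv⟩ := getB_foldl_set Lw (pvSetB st.1 i true) hLwb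
      -- the walk's minimum is the cycle minimum
      have hmin : ((List.range (Nat.find hOn - 1)).map
          (fun j => pvGetI c (iterF a (1+j) i))).foldl min (pvGetI c i) = cycMinI n c a i := by
        have hshape : ((List.range (Nat.find hOn - 1)).map
            (fun j => pvGetI c (iterF a (1+j) i))) = Lw.map (fun w => pvGetI c w) := by
          rw [hLw, List.map_map]
          rfl
        rw [hshape]
        have : (Lw.map (fun w => pvGetI c w)).foldl min (pvGetI c i)
            = minList ((i :: Lw).map (fun w => pvGetI c w)) := rfl
        rw [this, cycMinI]
        apply minList_eq_of_same_mem
        · simp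
        · simp [cycL_ne_nil n a hn i]
        · intro x
          simp only [List.mem_map]
          constructor
          · rintro ⟨y, hy, rfl⟩
            exact ⟨y, (walk_elems n a hn hf i hi0 hi1 hOn y).mp hy, rfl⟩
          · rintro ⟨y, hy, rfl⟩
            exact ⟨y, (walk_elems n a hn hf i hi0 hi1 hOn y).mpr hy, rfl⟩
      refine ⟨?_, ?_, ?_⟩
      · simpa [length_pvSetB, hlen] using hml
      · intro v hv0 hv1
        rw [hmv v (by omega)]
        have hsplit : pvGetB (pvSetB st.1 i true) v = true ↔ v = i ∨ pvGetB st.1 v = true := by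
          by_cases hvi : v = i
          · rw [hvi, getB_set_self st.1 i (by omega) (by omega)]
            simp
          · rw [getB_set_ne st.1 i v (by omega) (by omega) hvi]
            simp [hvi]
        constructor
        · intro hx
          rcases Bool.or_eq_true_iff.mp hx with hx' | hx'
          · rcases hsplit.mp hx' with hvi2 | hold
            · -- v = i itself
              rw [hvi2]
              exact ⟨hOn, i, self_mem_cycL n a hn i, by omega⟩
            · obtain ⟨hcv, w, hw, hwle⟩ := (hvis v hv0 hv1).mp hold
              exact ⟨hcv, w, hw, by omega⟩
          · -- v on the walked cycle
            have hvcyc : v ∈ cycL n a i := by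
              apply (walk_elems n a hn hf i hi0 hi1 hOn v).mp
              exact List.mem_cons_of_mem _ (of_decide_eq_true hx')
            have hEq : CycEq a i v := (mem_cycL_iff n a hf hn i hi0 hi1 hOn v).mp hvcyc
            have hcv : OnCyc a v := cycEq_onCyc a i v hEq
            refine ⟨hcv, i, ?_, by omega⟩
            exact (mem_cycL_iff n a hf hn v hv0 hv1 hcv i).mpr (cycEq_symm a i v hEq)
        · rintro ⟨hcv, w, hw, hwle⟩
          apply Bool.or_eq_true_iff.mpr
          by_cases hwk : w ≤ (k:Int)
          · left
            apply hsplit.mpr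
            right
            exact (hvis v hv0 hv1).mpr ⟨hcv, w, hw, hwk⟩
          · have hwi : w = i := by omega
            have hEq : CycEq a v i := by
              rw [← hwi]
              exact (mem_cycL_iff n a hf hn v hv0 hv1 hcv w).mp hw
            have hvmem : v ∈ i :: Lw := by
              apply (walk_elems n a hn hf i hi0 hi1 hOn v).mpr
              exact (mem_cycL_iff n a hf hn i hi0 hi1 hOn v).mpr (cycEq_symm a v i hEq)
            rcases List.mem_cons.mp hvmem with rfl | hvLw
            · left
              apply hsplit.mpr
              left
              rfl
            · right
              simp [hvLw]
      · -- the accumulated answer gains exactly this cycle's minimum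
        rw [hmin, hsum]
        have hgi0 : (if isRepB n a i && decide (i ≤ (k:Int)) then cycMinI n c a i else 0) = 0 := by
          rw [if_neg]
          simp only [Bool.and_eq_true, decide_eq_true_eq, not_and]
          intro _
          omega
        have hgi1 : (if isRepB n a i && decide (i ≤ (k:Int)+1) then cycMinI n c a i else 0)
            = cycMinI n c a i := by
          rw [if_pos]
          exact Bool.and_eq_true_iff.mpr ⟨hrep, decide_eq_true (by omega)⟩
        have hupd := sum_update (PySem.List.pyRange 1 (n+1) 1)
          (PySem.List.nodup_pyRange_one 1 (n+1))
          (fun v => if isRepB n a v && decide (v ≤ (k:Int)) then cycMinI n c a v else 0)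
          (fun v => if isRepB n a v && decide (v ≤ (k:Int)+1) then cycMinI n c a v else 0)
          i (PySem.List.mem_pyRange_one.mpr (by omega))
          (by
            intro w hw hne
            have hiff : w ≤ (k:Int)+1 ↔ w ≤ (k:Int) := by
              constructor
              · intro h
                rcases lt_or_eq_of_le h with h' | h'
                · omega
                · exact absurd h' hne
              · intro h
                omega
            simp only [decide_eq_decide.mpr hiff])
        rw [hupd]
        simp only [hgi0, hgi1]
        ring
  · -- not a cycle node: nothing happens
    have hcond : ¬ (0 < pvGetI (pIndF n a) i ∧ pvGetB st.1 i = false) := by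
      intro hc
      exact hOn (hchar.mp hc.1)
    simp only [stepB2, if_neg hcond]
    refine ⟨hlen, ?_, ?_⟩
    · intro v hv0 hv1
      rw [hvis v hv0 hv1]
      constructor
      · rintro ⟨hcv, w, hw, hwle⟩
        exact ⟨hcv, w, hw, by omega⟩
      · rintro ⟨hcv, w, hw, hwle⟩
        refine ⟨hcv, w, hw, ?_⟩
        have hwOn : OnCyc a w := cycEq_onCyc a v w ((mem_cycL_iff n a hf hn v hv0 hv1 hcv w).mp hw)
        have hwi : w ≠ i := fun he => hOn (he ▸ hwOn)
        omega
    · rw [hsum]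
      apply congrArg
      apply List.map_congr_left
      intro v hv
      have hvb := PySem.List.mem_pyRange_one.mp hv
      by_cases hvi : v = i
      · rw [hvi]
        have hrep : isRepB n a i = false := by
          rw [Bool.eq_false_iff]
          intro htrue
          obtain ⟨hc, -⟩ := Bool.and_eq_true_iff.mp htrue
          exact hOn ((onCycB_iff n a hf hn i hi0 hi1).mp hc)
        rw [hrep]
        simp
      · have : (decide (v ≤ (k:Int)) = decide (v ≤ (k:Int)+1)) := by
          have : v ≤ (k:Int) ↔ v ≤ (k:Int) + 1 := by
            constructor <;> intro <;> omega
          simp [decide_eq_decide.mpr this]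
        rw [this]


-- B's second loop, folded --------------------------------------------------

theorem foldB (n : Int) (c a : List Int) (hn : 0 < n)
    (hf : ∀ v, 1 ≤ v → v ≤ n → 1 ≤ pvGetI a v ∧ pvGetI a v ≤ n) :
    ∀ k : Nat, (k:Int) ≤ n →
    ((PySem.List.pyRange 1 (1+(k:Int)) 1).foldl (stepB2 c a (pIndF n a) (n.toNat + 1))
        (List.replicate (n+1).toNat false, 0)).1.length = n.toNat + 1 ∧
    (∀ v, 1 ≤ v → v ≤ n →
      (pvGetB ((PySem.List.pyRange 1 (1+(k:Int)) 1).foldl (stepB2 c a (pIndF n a) (n.toNat + 1))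
          (List.replicate (n+1).toNat false, 0)).1 v = true ↔
        OnCyc a v ∧ ∃ w ∈ cycL n a v, w ≤ (k:Int))) ∧
    ((PySem.List.pyRange 1 (1+(k:Int)) 1).foldl (stepB2 c a (pIndF n a) (n.toNat + 1))
        (List.replicate (n+1).toNat false, 0)).2
      = ((PySem.List.pyRange 1 (n+1) 1).map
        (fun v => if isRepB n a v && decide (v ≤ (k:Int)) then cycMinI n c a v else 0)).sum := by
  intro k
  induction k with
  | zero =>
    intro _
    have hr : PySem.List.pyRange 1 (1+((0:Nat):Int)) 1 = [] :=
      PySem.List.pyRange_one_eq_nil (by omega)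
    rw [hr]
    simp only [List.foldl_nil]
    refine ⟨?_, ?_, ?_⟩
    · simp only [List.length_replicate]
      omega
    · intro v hv0 hv1
      rw [getB_replicate]
      constructor
      · intro hc; cases hc
      · rintro ⟨hcv, w, hw, hwle⟩
        exfalso
        obtain ⟨_, m, rfl⟩ := (mem_cycL_iff n a hf hn v hv0 hv1 hcv w).mp hw
        have := iterF_mem n a hf m v hv0 hv1
        omega
    · symm
      apply List.sum_eq_zero
      intro x hx
      obtain ⟨v, hv, rfl⟩ := List.mem_map.mp hx
      have hvb := PySem.List.mem_pyRange_one.mp hv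
      rw [if_neg]
      simp only [Bool.and_eq_true, decide_eq_true_eq, not_and]
      intro _
      omega
  | succ k ih =>
    intro hk1
    have hk : (k:Int) ≤ n := by push_cast at hk1 ⊢; omega
    have hcast : (1:Int) + ((k+1:Nat):Int) = (1 + (k:Int)) + 1 := by push_cast; ring
    have hsplit : PySem.List.pyRange 1 (1+((k+1:Nat):Int)) 1
        = PySem.List.pyRange 1 (1+(k:Int)) 1 ++ [1+(k:Int)] := by
      rw [hcast]
      exact PySem.List.pyRange_one_succ_right (by omega)
    rw [hsplit, List.foldl_append]
    obtain ⟨ihl, ihv, ihs⟩ := ih hk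
    set stPrev := (PySem.List.pyRange 1 (1+(k:Int)) 1).foldl
      (stepB2 c a (pIndF n a) (n.toNat + 1)) (List.replicate (n+1).toNat false, 0) with hPrev
    have hstep := stepB2_inv n c a hn hf k (by push_cast at hk1; omega) stPrev ihl ihv ihs
    have hone : (1:Int) + (k:Int) = (k:Int) + 1 := by ring
    rw [List.foldl_cons, List.foldl_nil, hone]
    obtain ⟨h1, h2, h3⟩ := hstep
    refine ⟨h1, ?_, ?_⟩
    · intro v hv0 hv1
      rw [h2 v hv0 hv1]
      have : ((k:Int) + 1) = (((k+1:Nat)):Int) := by push_cast; ring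
      rw [this]
    · rw [h3]
      apply congrArg
      apply List.map_congr_left
      intro v _
      have : ((k:Int) + 1) = (((k+1:Nat)):Int) := by push_cast; ring
      rw [this]

-- B computes the sum of the cycle minima over the least representatives
theorem coreB_eq (n : Int) (c a : List Int) (hn : 0 < n)
    (hf : ∀ v, 1 ≤ v → v ≤ n → 1 ≤ pvGetI a v ∧ pvGetI a v ≤ n) :
    core_solve_alt n c a = ((PySem.List.pyRange 1 (n+1) 1).map
      (fun v => if isRepB n a v then cycMinI n c a v else 0)).sum := by
  have hend : (1:Int) + ((n.toNat:Nat):Int) = n + 1 := by omega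
  have hB : core_solve_alt n c a
      = ((PySem.List.pyRange 1 (1+((n.toNat:Nat):Int)) 1).foldl
          (stepB2 c a (pIndF n a) (n.toNat + 1))
          (List.replicate (n+1).toNat false, 0)).2 := by
    rw [hend]
    rfl
  rw [hB, (foldB n c a hn hf n.toNat (by omega)).2.2]
  apply congrArg
  apply List.map_congr_left
  intro v hv
  have hvb := PySem.List.mem_pyRange_one.mp hv
  have : decide (v ≤ ((n.toNat:Nat):Int)) = true := decide_eq_true (by omega)
  rw [this, Bool.and_true]


-- reachability ---------------------------------------------------------------

def ReachP (a : List Int) (k v : Int) : Prop :=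
  ∃ j : Int, 1 ≤ j ∧ j ≤ k ∧ ∃ m : Nat, iterF a m j = v

def reachB (n : Int) (a : List Int) (k v : Int) : Bool :=
  (PySem.List.pyRange 1 (k+1) 1).any
    (fun j => (List.range (n.toNat+1)).any (fun m => iterF a m j == v))

theorem reach_closed (a : List Int) (k v : Int) (h : ReachP a k v) (q : Nat) :
    ReachP a k (iterF a q v) := by
  obtain ⟨j, h0, h1, m, rfl⟩ := h
  exact ⟨j, h0, h1, m + q, (iterF_add a m q j).symm ▸ rfl⟩

theorem iter_mul (a : List Int) (v : Int) (s0 : Nat) (h : iterF a s0 v = v) :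
    ∀ q, iterF a (q * s0) v = v := by
  intro q
  induction q with
  | zero => simp [iterF]
  | succ q ih =>
    rw [show (q+1)*s0 = q*s0 + s0 from by ring, iterF_add, ih, h]

theorem reach_bound (n : Int) (a : List Int)
    (hf : ∀ v, 1 ≤ v → v ≤ n → 1 ≤ pvGetI a v ∧ pvGetI a v ≤ n)
    (j v : Int) (hj0 : 1 ≤ j) (hj1 : j ≤ n) (m : Nat) (hm : iterF a m j = v) :
    ∃ m', m' ≤ n.toNat ∧ iterF a m' j = v := by
  have hex : ∃ m, iterF a m j = v := ⟨m, hm⟩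
  set m0 := Nat.find hex with hm0
  have hm0v : iterF a m0 j = v := Nat.find_spec hex
  by_cases hle : m0 ≤ n.toNat
  · exact ⟨m0, hle, hm0v⟩
  exfalso
  have hmaps : ∀ x ∈ Finset.range (n.toNat+1), iterF a x j ∈ Finset.Icc (1:Int) n := by
    intro x _
    rw [Finset.mem_Icc]
    exact iterF_mem n a hf x j hj0 hj1
  have hcard : (Finset.Icc (1:Int) n).card < (Finset.range (n.toNat+1)).card := by
    rw [Int.card_Icc, Finset.card_range]
    omega
  obtain ⟨x, hx, y, hy, hxy, hfe⟩ :=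
    Finset.exists_ne_map_eq_of_card_lt_of_maps_to hcard hmaps
  rw [Finset.mem_range] at hx hy
  have haux : ∀ s t : Nat, s < t → t < n.toNat + 1 → iterF a s j = iterF a t j → False := by
    intro s t hst ht he
    have hev := iter_eventual a s (t - s) j (by omega)
      (by rw [show s + (t-s) = t from by omega]; exact he.symm)
    have hidx : iterF a m0 j = iterF a (s + (m0 - s) % (t - s)) j := by
      have := hev (m0 - s)
      rw [show s + (m0 - s) = m0 from by omega] at this
      exact this
    have hmod : (m0 - s) % (t - s) < t - s := Nat.mod_lt _ (by omega)
    have hlt : s + (m0 - s) % (t - s) < m0 := by omega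
    have : m0 ≤ s + (m0 - s) % (t - s) :=
      Nat.find_le (by rw [← hidx]; exact hm0v)
    omega
  rcases Nat.lt_or_ge x y with hlt | hge
  · exact haux x y hlt hy hfe
  · have : y < x := by omega
    exact haux y x this hx hfe.symm

theorem reachB_iff (n : Int) (a : List Int)
    (hf : ∀ v, 1 ≤ v → v ≤ n → 1 ≤ pvGetI a v ∧ pvGetI a v ≤ n)
    (k v : Int) (hk : k ≤ n) : reachB n a k v = true ↔ ReachP a k v := by
  constructor
  · intro h
    obtain ⟨j, hjmem, hin⟩ := List.any_eq_true.mp h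
    obtain ⟨m, _, hme⟩ := List.any_eq_true.mp hin
    have hjb := PySem.List.mem_pyRange_one.mp hjmem
    exact ⟨j, by omega, by omega, m, by simpa using hme⟩
  · rintro ⟨j, hj0, hjk, m, hm⟩
    obtain ⟨m', hm'le, hm'⟩ := reach_bound n a hf j v hj0 (by omega) m hm
    apply List.any_eq_true.mpr
    refine ⟨j, PySem.List.mem_pyRange_one.mpr (by omega), ?_⟩
    apply List.any_eq_true.mpr
    exact ⟨m', List.mem_range.mpr (by omega), by simpa using hm'⟩

-- a linked path starting at x0 consists of the iterates of x0 -----------------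

theorem linked_getD (a : List Int) : ∀ (Pl : List Int) (cur x0 : Int),
    LinkedTo a Pl cur → Pl.head? = some x0 →
    (∀ t, t < Pl.length → Pl.getD t 0 = iterF a t x0) ∧ iterF a Pl.length x0 = cur := by
  intro Pl
  induction Pl with
  | nil => intro cur x0 _ hh; cases hh
  | cons x xs ih =>
    intro cur x0 hL hh
    have hx0 : x0 = x := by
      simp only [List.head?_cons, Option.some.injEq] at hh
      exact hh.symm
    subst hx0
    obtain ⟨hlink, hrest⟩ := hL
    cases xs with
    | nil =>
      constructor
      · intro t ht
        simp only [List.length_singleton] at ht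
        interval_cases t
        rfl
      · show iterF a 0 (pvGetI a x0) = cur
        simp only [List.headD_nil] at hlink
        simpa using hlink
    | cons y ys =>
      have hxy : pvGetI a x0 = y := by simpa using hlink
      obtain ⟨ih1, ih2⟩ := ih cur y hrest (by simp)
      constructor
      · intro t ht
        cases t with
        | zero => rfl
        | succ t' =>
          rw [List.getD_cons_succ, ih1 t' (by simpa using ht)]
          show iterF a t' y = iterF a t' (pvGetI a x0)
          rw [hxy]
      · show iterF a ((y::ys).length) (pvGetI a x0) = cur
        rw [hxy]
        exact ih2

theorem foldl_min_flip (l : List Int) : ∀ m : Int,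
    l.foldl (fun m x => min x m) m = l.foldl min m := by
  induction l with
  | nil => intro m; rfl
  | cons x t ih =>
    intro m
    simp only [List.foldl_cons]
    rw [min_comm]
    exact ih _

theorem cwalkA_run (c a : List Int) (i : Int) (hcyc : OnCyc a i) :
    ∀ (t s : Nat), s + t = Nat.find hcyc → 1 ≤ s → ∀ fuel, t < fuel → ∀ (m : Int),
    cwalkA c a i fuel (iterF a s i) m =
      ((List.range t).map (fun j => pvGetI c (iterF a (s+j) i))).foldl
        (fun m x => min x m) m := by
  obtain ⟨hp, hpcyc, hpmin⟩ := period_spec a i hcyc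
  intro t
  induction t with
  | zero =>
    intro s hs hs1 fuel hfuel m
    obtain ⟨f, rfl⟩ : ∃ f, fuel = f + 1 := ⟨fuel - 1, by omega⟩
    have : iterF a s i = i := by
      rw [show s = Nat.find hcyc from by omega, hpcyc]
    rw [this]
    simp [cwalkA]
  | succ t ih =>
    intro s hs hs1 fuel hfuel m
    obtain ⟨f, rfl⟩ : ∃ f, fuel = f + 1 := ⟨fuel - 1, by omega⟩
    have hne : iterF a s i ≠ i := hpmin s (by omega) (by omega)
    simp only [cwalkA, if_neg hne]
    have hstep : pvGetI a (iterF a s i) = iterF a (s+1) i := (iterF_succ' a s i).symm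
    rw [hstep, ih (s+1) (by omega) (by omega) f (by omega)]
    rw [List.range_succ_eq_map]
    simp only [List.map_cons, List.map_map, List.foldl_cons]
    congr 1
    apply List.map_congr_left
    intro j _
    simp only [Function.comp_apply]
    congr 2
    omega


-- one step of A's outer loop ----------------------------------------------------

theorem stepA_inv (n : Int) (c a : List Int) (hn : 0 < n)
    (ha : n + 1 ≤ (a.length : Int))
    (hab : ∀ x ∈ (a.drop 1).take n.toNat, 1 ≤ x ∧ x ≤ n)
    (k : Nat) (hk : (k:Int) + 1 ≤ n)
    (st : List Bool × Int × PySem.Dict Int Int × Int)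
    (hlen : st.1.length = n.toNat + 1)
    (hvis : ∀ v, 1 ≤ v → v ≤ n → (pvGetB st.1 v = true ↔ ReachP a (k:Int) v))
    (hd : dOK n st.2.2.1 st.2.2.2 st.1)
    (hsum : st.2.1 = ((PySem.List.pyRange 1 (n+1) 1).map
      (fun v => if isRepB n a v && reachB n a (k:Int) v then cycMinI n c a v else 0)).sum) :
    (stepA c a (n.toNat+2) st ((k:Int)+1)).1.length = n.toNat + 1 ∧
    (∀ v, 1 ≤ v → v ≤ n →
      (pvGetB (stepA c a (n.toNat+2) st ((k:Int)+1)).1 v = true ↔ ReachP a ((k:Int)+1) v)) ∧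
    dOK n (stepA c a (n.toNat+2) st ((k:Int)+1)).2.2.1
      (stepA c a (n.toNat+2) st ((k:Int)+1)).2.2.2
      (stepA c a (n.toNat+2) st ((k:Int)+1)).1 ∧
    (stepA c a (n.toNat+2) st ((k:Int)+1)).2.1
      = ((PySem.List.pyRange 1 (n+1) 1).map
        (fun v => if isRepB n a v && reachB n a ((k:Int)+1) v then cycMinI n c a v else 0)).sum := by
  have hf : ∀ v, 1 ≤ v → v ≤ n → 1 ≤ pvGetI a v ∧ pvGetI a v ≤ n :=
    fun v h0 h1 => aStep n a ha hab v h0 h1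
  set i : Int := (k:Int) + 1 with hidef
  have hi0 : 1 ≤ i := by omega
  have hi1 : i ≤ n := hk
  by_cases hvi : pvGetB st.1 i
  · -- i already visited: nothing changes, nothing newly reachable
    have hri : ReachP a (k:Int) i := (hvis i hi0 hi1).mp hvi
    have hre : ∀ v, ReachP a i v ↔ ReachP a (k:Int) v := by
      intro v
      constructor
      · rintro ⟨j, hj0, hj1, m, rfl⟩
        by_cases hjk : j ≤ (k:Int)
        · exact ⟨j, hj0, hjk, m, rfl⟩
        · have hji : j = i := by omega
          obtain ⟨j', hj'0, hj'k, m', hm'⟩ := hri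
          refine ⟨j', hj'0, hj'k, m' + m, ?_⟩
          rw [iterF_add, hm', hji]
      · rintro ⟨j, hj0, hj1, m, rfl⟩
        exact ⟨j, hj0, by omega, m, rfl⟩
    simp only [stepA, hvi, if_true]
    refine ⟨hlen, ?_, hd, ?_⟩
    · intro v hv0 hv1
      rw [hvis v hv0 hv1]
      exact (hre v).symm
    · rw [hsum]
      apply congrArg
      apply List.map_congr_left
      intro v hv
      have hbe : reachB n a i v = reachB n a (k:Int) v := by
        rw [Bool.eq_iff_iff, reachB_iff n a hf i v hi1,
          reachB_iff n a hf (k:Int) v (by omega)]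
        exact hre v
      rw [hbe]
  · -- i unvisited: the walk happens
    have hvif : pvGetB st.1 i = false := by simpa using hvi
    have hfuel : st.1.count false < n.toNat + 2 := by
      have := List.count_le_length (a := false) (l := st.1)
      omega
    obtain ⟨m1, m2, m3, m4, m6, m7, m8, m9, m10, m11⟩ :=
      pwalk_master n a ha hab (n.toNat+2) st.1 i hlen hi0 hi1 hfuel
    obtain ⟨hA1, hA2⟩ := walkA_eq a st.2.2.2 (n.toNat+2) st.1 st.2.2.1 i
    simp only [stepA, hvi, Bool.false_eq_true, if_false]
    rw [hA1, hA2]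
    set Pl := (pwalk a (n.toNat+2) st.1 [] i).2.1 with hPl
    set cur := (pwalk a (n.toNat+2) st.1 [] i).2.2 with hcurdef
    set vis' := (pwalk a (n.toNat+2) st.1 [] i).1 with hvisdef
    have hPne : Pl ≠ [] := by
      intro hnil
      have hcisi : cur = i := m8 hnil
      have h6 : pvGetB vis' i = true := by rw [← hcisi]; exact m6
      rcases (m11 i hi0 hi1).mp h6 with hv | hmem
      · simp [hvif] at hv
      · rw [hnil] at hmem
        cases hmem
    have hhead := m9 hPne
    obtain ⟨hPt, hPcur⟩ := linked_getD a Pl cur i m7 hhead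
    set L := Pl.length with hLdef
    have hLpos : 0 < L := List.length_pos_of_ne_nil hPne
    have hPreach : ∀ x ∈ Pl, ReachP a i x := by
      intro x hx
      obtain ⟨t, ht, htv⟩ := mem_getD Pl x hx
      exact ⟨i, hi0, le_refl i, t, by rw [← hPt t ht, htv]⟩
    have hdval := walkA_d a st.2.2.2 (n.toNat+2) st.1 st.2.2.1 i cur
    have hcvis : pvGetB st.1 cur = true ∨ cur ∈ Pl := (m11 cur m3.1 m3.2).mp m6
    have hcond : ((walkA a st.2.2.2 (n.toNat+2) st.1 st.2.2.1 i).2.1.getD cur 0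
        = st.2.2.2) ↔ cur ∈ Pl := by
      constructor
      · intro he
        by_contra hmem
        rw [hdval, if_neg hmem] at he
        have hvold : pvGetB st.1 cur = true := by
          rcases hcvis with h | h
          · exact h
          · exact absurd h hmem
        have := hd cur m3.1 m3.2 hvold
        omega
      · intro hmem
        rw [hdval, if_pos hmem]
    have hdOK' : dOK n (walkA a st.2.2.2 (n.toNat+2) st.1 st.2.2.1 i).2.1
        (st.2.2.2 + 1) vis' := by
      intro v hv0 hv1 hvv
      rw [walkA_d a st.2.2.2 (n.toNat+2) st.1 st.2.2.1 i v]
      by_cases hvPl : v ∈ Pl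
      · rw [if_pos hvPl]
        omega
      · rw [if_neg hvPl]
        have hvold : pvGetB st.1 v = true := by
          rcases (m11 v hv0 hv1).mp hvv with h | h
          · exact h
          · exact absurd h hvPl
        have := hd v hv0 hv1 hvold
        omega
    by_cases hcurP : cur ∈ Pl
    · -- a new cycle is closed
      rw [if_pos (hcond.mpr hcurP)]
      obtain ⟨t0, ht0, ht0v⟩ := mem_getD Pl cur hcurP
      have hcurit : iterF a t0 i = cur := by rw [← hPt t0 ht0, ht0v]
      have hp' : 0 < L - t0 := by omega
      have hper : iterF a (L - t0) cur = cur := by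
        calc iterF a (L - t0) cur = iterF a (L - t0) (iterF a t0 i) := by rw [hcurit]
          _ = iterF a (t0 + (L - t0)) i := (iterF_add a t0 _ i).symm
          _ = iterF a L i := by congr 1; omega
          _ = cur := hPcur
      have hcyccur : OnCyc a cur := ⟨L - t0, hp', hper⟩
      have hcb := m3
      have hcycsub : ∀ x ∈ cycL n a cur, x ∈ Pl := by
        intro x hx
        obtain ⟨_, q, rfl⟩ := (mem_cycL_iff n a hf hn cur hcb.1 hcb.2 hcyccur x).mp hx
        rw [onCyc_mod a cur (L - t0) hp' hper q]
        have hqlt : q % (L - t0) < L - t0 := Nat.mod_lt _ hp'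
        have hval : iterF a (q % (L - t0)) cur = Pl.getD (t0 + q % (L - t0)) 0 := by
          calc iterF a (q % (L - t0)) cur
              = iterF a (q % (L - t0)) (iterF a t0 i) := by rw [hcurit]
            _ = iterF a (t0 + q % (L - t0)) i := (iterF_add a t0 _ i).symm
            _ = Pl.getD (t0 + q % (L - t0)) 0 := (hPt _ (by omega)).symm
        rw [hval]
        exact getD_mem Pl _ (by omega)
      have hOnP : ∀ x ∈ Pl, OnCyc a x → CycEq a cur x := by
        rintro x hx ⟨s0, hs0, hxs0⟩
        obtain ⟨t', ht', ht'v⟩ := mem_getD Pl x hx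
        have hxit : iterF a t' i = x := by rw [← hPt t' ht', ht'v]
        have hmul : iterF a (L * s0) x = x := iter_mul a x s0 hxs0 L
        have hge : L ≤ t' + L * s0 := by
          have : L ≤ L * s0 := Nat.le_mul_of_pos_right L hs0
          omega
        refine ⟨hcyccur, t' + L * s0 - L, ?_⟩
        calc iterF a (t' + L*s0 - L) cur
            = iterF a (t' + L*s0 - L) (iterF a L i) := by rw [hPcur]
          _ = iterF a (L + (t' + L*s0 - L)) i := (iterF_add a L _ i).symm
          _ = iterF a (t' + L*s0) i := by congr 1; omega
          _ = iterF a (L*s0) (iterF a t' i) := iterF_add a t' _ i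
          _ = x := by rw [hxit, hmul]
      set r0 := minList (cycL n a cur) with hr0def
      have hr0mem : r0 ∈ cycL n a cur := minList_mem _ (cycL_ne_nil n a hn cur)
      have hEqr0 : CycEq a cur r0 :=
        (mem_cycL_iff n a hf hn cur hcb.1 hcb.2 hcyccur r0).mp hr0mem
      have hr0b : 1 ≤ r0 ∧ r0 ≤ n := by
        obtain ⟨q, _, hqv⟩ := List.mem_map.mp hr0mem
        rw [← hqv]
        exact iterF_mem n a hf q cur hcb.1 hcb.2
      have hr0on : OnCyc a r0 := cycEq_onCyc a cur r0 hEqr0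
      have hr0rep : isRepB n a r0 = true := by
        apply Bool.and_eq_true_iff.mpr
        constructor
        · exact (onCycB_iff n a hf hn r0 hr0b.1 hr0b.2).mpr hr0on
        · apply List.all_eq_true.mpr
          intro w hw
          have hw' : w ∈ cycL n a cur :=
            (cycL_same n a hf hn cur r0 hcb.1 hcb.2 hEqr0 w).mpr hw
          exact decide_eq_true (minList_le _ w hw')
      have hr0P : r0 ∈ Pl := hcycsub r0 hr0mem
      have hr0fresh : pvGetB st.1 r0 = false := (m1 r0 hr0P).2
      have hple := period_le n a hf cur hcb.1 hcb.2 hcyccur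
      have h1c : iterF a 1 cur = pvGetI a cur := by
        rw [iterF_succ' a 0 cur]
        rfl
      have hrunA := cwalkA_run c a cur hcyccur (Nat.find hcyccur - 1) 1 (by
          obtain ⟨hpp, _, _⟩ := period_spec a cur hcyccur
          omega) (by omega)
        (n.toNat+2) (by omega) (pvGetI c cur)
      rw [h1c] at hrunA
      have hminA : cwalkA c a cur (n.toNat+2) (pvGetI a cur) (pvGetI c cur)
          = cycMinI n c a cur := by
        rw [hrunA, foldl_min_flip]
        have hshape : ((List.range (Nat.find hcyccur - 1)).map
              (fun j => pvGetI c (iterF a (1+j) cur)))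
            = ((List.range (Nat.find hcyccur - 1)).map
              (fun j => iterF a (1+j) cur)).map (fun w => pvGetI c w) := by
          rw [List.map_map]
          rfl
        rw [hshape]
        have hml : (((List.range (Nat.find hcyccur - 1)).map
              (fun j => iterF a (1+j) cur)).map (fun w => pvGetI c w)).foldl min (pvGetI c cur)
            = minList ((cur :: (List.range (Nat.find hcyccur - 1)).map
              (fun j => iterF a (1+j) cur)).map (fun w => pvGetI c w)) := rfl
        rw [hml, cycMinI]
        apply minList_eq_of_same_mem
        · simp
        · simp [cycL_ne_nil n a hn cur]
        · intro x
          simp only [List.mem_map]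
          constructor
          · rintro ⟨y, hy, rfl⟩
            exact ⟨y, (walk_elems n a hn hf cur hcb.1 hcb.2 hcyccur y).mp hy, rfl⟩
          · rintro ⟨y, hy, rfl⟩
            exact ⟨y, (walk_elems n a hn hf cur hcb.1 hcb.2 hcyccur y).mpr hy, rfl⟩
      have hreachdec : ∀ v, ReachP a i v ↔ (ReachP a (k:Int) v ∨ v ∈ Pl) := by
        intro v
        constructor
        · rintro ⟨j, hj0, hj1, m, rfl⟩
          by_cases hjk : j ≤ (k:Int)
          · exact Or.inl ⟨j, hj0, hjk, m, rfl⟩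
          · have hji : j = i := by omega
            subst hji
            right
            by_cases hmL : m < L
            · rw [← hPt m hmL]
              exact getD_mem Pl m hmL
            · apply hcycsub
              have hsplit : iterF a m i = iterF a (m - L) cur := by
                rw [← hPcur, ← iterF_add]
                congr 1
                omega
              rw [hsplit]
              exact (mem_cycL_iff n a hf hn cur hcb.1 hcb.2 hcyccur _).mpr
                ⟨hcyccur, m - L, rfl⟩
        · rintro (⟨j, hj0, hj1, m, rfl⟩ | hv)
          · exact ⟨j, hj0, by omega, m, rfl⟩
          · exact hPreach _ hv
      refine ⟨m4, ?_, hdOK', ?_⟩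
      · intro v hv0 hv1
        rw [m11 v hv0 hv1, hvis v hv0 hv1]
        exact (hreachdec v).symm
      · rw [hminA, hsum]
        have hother : ∀ w ∈ PySem.List.pyRange 1 (n+1) 1, w ≠ r0 →
            (if isRepB n a w && reachB n a i w then cycMinI n c a w else 0)
              = (if isRepB n a w && reachB n a (k:Int) w then cycMinI n c a w else 0) := by
          intro w hw hne
          have hwb := PySem.List.mem_pyRange_one.mp hw
          by_cases hrw : isRepB n a w = true
          · have hwOn : OnCyc a w := (onCycB_iff n a hf hn w (by omega) (by omega)).mp
              (Bool.and_eq_true_iff.mp hrw).1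
            have hwP : w ∉ Pl := by
              intro hc
              apply hne
              apply rep_unique n a hf hn w r0 (by omega) (by omega) hr0b.1 hr0b.2 ?_ hrw hr0rep
              exact cycEq_trans a w cur r0 (cycEq_symm a cur w (hOnP w hc hwOn)) hEqr0
            have hiff : ReachP a i w ↔ ReachP a (k:Int) w := by
              rw [hreachdec w]
              constructor
              · rintro (h | h)
                · exact h
                · exact absurd h hwP
              · exact Or.inl
            have hbe : reachB n a i w = reachB n a (k:Int) w := by
              rw [Bool.eq_iff_iff, reachB_iff n a hf i w hi1,
                reachB_iff n a hf (k:Int) w (by omega)]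
              exact hiff
            rw [hbe]
          · have hrw' : isRepB n a w = false := by simpa using hrw
            rw [hrw']
            simp
        have hupd := sum_update (PySem.List.pyRange 1 (n+1) 1)
          (PySem.List.nodup_pyRange_one 1 (n+1))
          (fun v => if isRepB n a v && reachB n a (k:Int) v then cycMinI n c a v else 0)
          (fun v => if isRepB n a v && reachB n a i v then cycMinI n c a v else 0)
          r0 (PySem.List.mem_pyRange_one.mpr (by omega))
          hother
        rw [hupd]
        have hg0 : (if isRepB n a r0 && reachB n a (k:Int) r0 then cycMinI n c a r0 else 0)
            = 0 := by
          rw [if_neg]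
          intro hcnd
          obtain ⟨-, hrB⟩ := Bool.and_eq_true_iff.mp hcnd
          have hr := (reachB_iff n a hf (k:Int) r0 (by omega)).mp hrB
          have := (hvis r0 hr0b.1 hr0b.2).mpr hr
          rw [hr0fresh] at this
          cases this
        have hg1 : (if isRepB n a r0 && reachB n a i r0 then cycMinI n c a r0 else 0)
            = cycMinI n c a r0 := by
          rw [if_pos]
          apply Bool.and_eq_true_iff.mpr
          exact ⟨hr0rep, (reachB_iff n a hf i r0 hi1).mpr (hPreach r0 hr0P)⟩
        simp only [hg0, hg1]
        rw [cycMinI_same n c a hf hn cur r0 hcb.1 hcb.2 hEqr0]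
        ring
    · -- the walk ran into an old component
      rw [if_neg (fun he => hcurP (hcond.mp he))]
      have hcurold : pvGetB st.1 cur = true := by
        rcases hcvis with h | h
        · exact h
        · exact absurd h hcurP
      have hrcur : ReachP a (k:Int) cur := (hvis cur m3.1 m3.2).mp hcurold
      have hreachdec : ∀ v, ReachP a i v ↔ (ReachP a (k:Int) v ∨ v ∈ Pl) := by
        intro v
        constructor
        · rintro ⟨j, hj0, hj1, m, rfl⟩
          by_cases hjk : j ≤ (k:Int)
          · exact Or.inl ⟨j, hj0, hjk, m, rfl⟩
          · have hji : j = i := by omega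
            subst hji
            by_cases hmL : m < L
            · right
              rw [← hPt m hmL]
              exact getD_mem Pl m hmL
            · left
              have hsplit : iterF a m i = iterF a (m - L) cur := by
                rw [← hPcur, ← iterF_add]
                congr 1
                omega
              rw [hsplit]
              exact reach_closed a (k:Int) cur hrcur (m - L)
        · rintro (⟨j, hj0, hj1, m, rfl⟩ | hv)
          · exact ⟨j, hj0, by omega, m, rfl⟩
          · exact hPreach _ hv
      refine ⟨m4, ?_, hdOK', ?_⟩
      · intro v hv0 hv1
        rw [m11 v hv0 hv1, hvis v hv0 hv1]
        exact (hreachdec v).symm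
      · rw [hsum]
        apply congrArg
        apply List.map_congr_left
        intro w hw
        have hwb := PySem.List.mem_pyRange_one.mp hw
        by_cases hrw : isRepB n a w = true
        · have hwOn : OnCyc a w := (onCycB_iff n a hf hn w (by omega) (by omega)).mp
            (Bool.and_eq_true_iff.mp hrw).1
          have hiff : ReachP a i w ↔ ReachP a (k:Int) w := by
            rw [hreachdec w]
            constructor
            · rintro (h | h)
              · exact h
              · -- w on a cycle inside the path: it wraps into the old component
                obtain ⟨s0, hs0, hxs0⟩ := hwOn
                obtain ⟨t', ht', ht'v⟩ := mem_getD Pl w h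
                have hxit : iterF a t' i = w := by rw [← hPt t' ht', ht'v]
                have hmul : iterF a (L * s0) w = w := iter_mul a w s0 hxs0 L
                have hge : L ≤ t' + L * s0 := by
                  have : L ≤ L * s0 := Nat.le_mul_of_pos_right L hs0
                  omega
                have hwcur : w = iterF a (t' + L*s0 - L) cur := by
                  calc w = iterF a (L*s0) w := hmul.symm
                    _ = iterF a (L*s0) (iterF a t' i) := by rw [hxit]
                    _ = iterF a (t' + L*s0) i := (iterF_add a t' _ i).symm
                    _ = iterF a (L + (t' + L*s0 - L)) i := by congr 1; omega
                    _ = iterF a (t' + L*s0 - L) (iterF a L i) := iterF_add a L _ i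
                    _ = iterF a (t' + L*s0 - L) cur := by rw [hPcur]
                rw [hwcur]
                exact reach_closed a (k:Int) cur hrcur _
            · exact Or.inl
          have hbe : reachB n a i w = reachB n a (k:Int) w := by
            rw [Bool.eq_iff_iff, reachB_iff n a hf i w hi1,
              reachB_iff n a hf (k:Int) w (by omega)]
            exact hiff
          rw [hbe]
        · have hrw' : isRepB n a w = false := by simpa using hrw
          rw [hrw']
          simp

-- A's loop, folded -------------------------------------------------------------

theorem foldA (n : Int) (c a : List Int) (hn : 0 < n)
    (ha : n + 1 ≤ (a.length : Int))
    (hab : ∀ x ∈ (a.drop 1).take n.toNat, 1 ≤ x ∧ x ≤ n) :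
    ∀ k : Nat, (k:Int) ≤ n →
    ((PySem.List.pyRange 1 (1+(k:Int)) 1).foldl (stepA c a (n.toNat+2))
        (List.replicate (n+1).toNat false, 0, (PySem.Dict.empty : PySem.Dict Int Int), 0)).1.length
      = n.toNat + 1 ∧
    (∀ v, 1 ≤ v → v ≤ n →
      (pvGetB ((PySem.List.pyRange 1 (1+(k:Int)) 1).foldl (stepA c a (n.toNat+2))
          (List.replicate (n+1).toNat false, 0, (PySem.Dict.empty : PySem.Dict Int Int), 0)).1 v
        = true ↔ ReachP a (k:Int) v)) ∧
    dOK n ((PySem.List.pyRange 1 (1+(k:Int)) 1).foldl (stepA c a (n.toNat+2))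
        (List.replicate (n+1).toNat false, 0, (PySem.Dict.empty : PySem.Dict Int Int), 0)).2.2.1
      ((PySem.List.pyRange 1 (1+(k:Int)) 1).foldl (stepA c a (n.toNat+2))
        (List.replicate (n+1).toNat false, 0, (PySem.Dict.empty : PySem.Dict Int Int), 0)).2.2.2
      ((PySem.List.pyRange 1 (1+(k:Int)) 1).foldl (stepA c a (n.toNat+2))
        (List.replicate (n+1).toNat false, 0, (PySem.Dict.empty : PySem.Dict Int Int), 0)).1 ∧
    ((PySem.List.pyRange 1 (1+(k:Int)) 1).foldl (stepA c a (n.toNat+2))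
        (List.replicate (n+1).toNat false, 0, (PySem.Dict.empty : PySem.Dict Int Int), 0)).2.1
      = ((PySem.List.pyRange 1 (n+1) 1).map
        (fun v => if isRepB n a v && reachB n a (k:Int) v then cycMinI n c a v else 0)).sum := by
  intro k
  induction k with
  | zero =>
    intro _
    have hr : PySem.List.pyRange 1 (1+((0:Nat):Int)) 1 = [] :=
      PySem.List.pyRange_one_eq_nil (by omega)
    rw [hr]
    simp only [List.foldl_nil]
    refine ⟨?_, ?_, ?_, ?_⟩
    · simp only [List.length_replicate]
      omega
    · intro v hv0 hv1
      rw [getB_replicate]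
      constructor
      · intro hc
        cases hc
      · rintro ⟨j, hj0, hj1, -⟩
        exfalso
        push_cast at hj1
        omega
    · intro v hv0 hv1 hvv
      rw [getB_replicate] at hvv
      cases hvv
    · symm
      apply List.sum_eq_zero
      intro x hx
      obtain ⟨v, hv, rfl⟩ := List.mem_map.mp hx
      have hrB : reachB n a ((0:Nat):Int) v = false := by
        unfold reachB
        rw [PySem.List.pyRange_one_eq_nil (by omega)]
        rfl
      rw [hrB, Bool.and_false]
      rfl
  | succ k ih =>
    intro hk1
    have hk : (k:Int) ≤ n := by push_cast at hk1 ⊢; omega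
    have hcast : (1:Int) + ((k+1:Nat):Int) = (1 + (k:Int)) + 1 := by push_cast; ring
    have hsplit : PySem.List.pyRange 1 (1+((k+1:Nat):Int)) 1
        = PySem.List.pyRange 1 (1+(k:Int)) 1 ++ [1+(k:Int)] := by
      rw [hcast]
      exact PySem.List.pyRange_one_succ_right (by omega)
    rw [hsplit, List.foldl_append]
    obtain ⟨ihl, ihv, ihd, ihs⟩ := ih hk
    set stPrev := (PySem.List.pyRange 1 (1+(k:Int)) 1).foldl (stepA c a (n.toNat+2))
      (List.replicate (n+1).toNat false, 0, (PySem.Dict.empty : PySem.Dict Int Int), 0)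
      with hPrev
    have hstep := stepA_inv n c a hn ha hab k (by push_cast at hk1; omega)
      stPrev ihl ihv ihd ihs
    have hone : (1:Int) + (k:Int) = (k:Int) + 1 := by ring
    rw [List.foldl_cons, List.foldl_nil, hone]
    obtain ⟨h1, h2, h3, h4⟩ := hstep
    refine ⟨h1, ?_, h3, ?_⟩
    · intro v hv0 hv1
      rw [h2 v hv0 hv1]
      have hc2 : ((k:Int) + 1) = (((k+1:Nat)):Int) := by push_cast; ring
      rw [hc2]
    · rw [h4]
      apply congrArg
      apply List.map_congr_left
      intro v _
      have hc2 : ((k:Int) + 1) = (((k+1:Nat)):Int) := by push_cast; ring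
      rw [hc2]

-- A computes the same representative sum
theorem coreA_eq (n : Int) (c a : List Int) (hn : 0 < n)
    (ha : n + 1 ≤ (a.length : Int))
    (hab : ∀ x ∈ (a.drop 1).take n.toNat, 1 ≤ x ∧ x ≤ n) :
    core_solve n c a = ((PySem.List.pyRange 1 (n+1) 1).map
      (fun v => if isRepB n a v then cycMinI n c a v else 0)).sum := by
  have hf : ∀ v, 1 ≤ v → v ≤ n → 1 ≤ pvGetI a v ∧ pvGetI a v ≤ n :=
    fun v h0 h1 => aStep n a ha hab v h0 h1
  have hend : (1:Int) + ((n.toNat:Nat):Int) = n + 1 := by omega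
  have hA : core_solve n c a
      = ((PySem.List.pyRange 1 (1+((n.toNat:Nat):Int)) 1).foldl (stepA c a (n.toNat+2))
          (List.replicate (n+1).toNat false, 0, (PySem.Dict.empty : PySem.Dict Int Int), 0)).2.1 := by
    rw [hend]
    rfl
  rw [hA, (foldA n c a hn ha hab n.toNat (by omega)).2.2.2]
  apply congrArg
  apply List.map_congr_left
  intro v hv
  have hvb := PySem.List.mem_pyRange_one.mp hv
  by_cases hrep : isRepB n a v = true
  · have hrB : reachB n a ((n.toNat:Nat):Int) v = true := by
      apply (reachB_iff n a hf _ v (by omega)).mpr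
      exact ⟨v, by omega, by omega, 0, rfl⟩
    rw [hrep, hrB]
    simp
  · have hrep' : isRepB n a v = false := by simpa using hrep
    rw [hrep']
    simp

-- ===== VERDICT (by name: the statement is the Claim_ definition above) =====
theorem core_solve_spec : Claim_equal_core_solve := by
  intro n c a _hdom hpre
  unfold Spec_core_solve
  rcases hpre with hneg | ⟨hn, hc, ha, hab⟩
  · have hr : PySem.List.pyRange 1 (n+1) 1 = [] := PySem.List.pyRange_one_eq_nil (by omega)
    unfold core_solve core_solve_alt bIndeg0
    rw [hr]
    simp
  · rw [coreA_eq n c a hn ha hab,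
      coreB_eq n c a hn (fun v h0 h1 => aStep n a ha hab v h0 h1)]
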